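-- pv_equiv track=rewrite | github.com/JKH-ML/coding-test | study/baekjoon/dfs/2667번 - 단지번호붙이기/단지번호붙이기.py | solution
-- ===== SOURCE A (Python) =====
-- def solution(n, data):
--     dx = [1, 0, -1, 0]
--     dy = [0, -1, 0, 1]
--     result = []
--
--     for i in range(n):
--         for j in range(n):
--             if data[i][j] == 1:
--                 count = 0
--                 S = [(i, j)]
--                 data[i][j] = 2
--
--                 while S:
--                     x, y = S.pop()
--                     count += 1
--
--                     for d in range(4):
--                         nx = x + dx[d]
--                         ny = y + dy[d]
--                         if 0 <= nx < n and 0 <= ny < n and data[nx][ny] == 1: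
--                             S.append((nx, ny))
--                             data[nx][ny] = 2
--
--                 result.append(count)
--
--     result.sort()
--     return str(len(result)) + '\n' + '\n'.join(map(str, result))
-- ===== SOURCE B (Python) =====
-- def solution(n, data):
--     # connected-component labelling by iterative min-label propagation (no stack/queue):
--     # each free cell starts with its own index i*n+j; zigzag sweeps replace every label
--     # by the minimum over itself and its free neighbours until a fixpoint, at which
--     # every cell carries the smallest index of its component; sizes are then counted
--     # per label value.
--     label = [[i * n + j if data[i][j] == 1 else -1 for j in range(n)] for i in range(n)]
--
--     def relax(i, j):
--         m = label[i][j]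
--         if i + 1 < n and label[i + 1][j] != -1:
--             m = min(m, label[i + 1][j])
--         if i > 0 and label[i - 1][j] != -1:
--             m = min(m, label[i - 1][j])
--         if j + 1 < n and label[i][j + 1] != -1:
--             m = min(m, label[i][j + 1])
--         if j > 0 and label[i][j - 1] != -1:
--             m = min(m, label[i][j - 1])
--         if m < label[i][j]:
--             label[i][j] = m
--             return True
--         return False
--
--     changed = True
--     while changed:
--         changed = False
--         for i in range(n):
--             for j in range(n):
--                 if label[i][j] != -1 and relax(i, j):
--                     changed = True
--         for i in reversed(range(n)):
--             for j in reversed(range(n)):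
--                 if label[i][j] != -1 and relax(i, j):
--                     changed = True
--
--     flat = [label[i][j] for i in range(n) for j in range(n) if label[i][j] != -1]
--     roots = sorted(set(flat))
--     return str(len(roots)) + '\n' + '\n'.join(str(c) for c in sorted(flat.count(r) for r in roots))
-- ===== Notes on version B (the rewrite author's own statement) =====
-- stated objective: alternative
-- what changed: A extracts each component with an in-place grid-mutating DFS stack flood fill; B uses the classic iterative connected-component-labelling algorithm: every 1-cell starts with its own index i*n+j, zigzag sweeps replace each label by the minimum over itself and its free neighbours until a fixpoint (so each cell ends with the smallest index of its component), and sizes are counted per distinct label; no stack, queue or flood fill at all, and data is not mutated.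
import Mathlib
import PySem

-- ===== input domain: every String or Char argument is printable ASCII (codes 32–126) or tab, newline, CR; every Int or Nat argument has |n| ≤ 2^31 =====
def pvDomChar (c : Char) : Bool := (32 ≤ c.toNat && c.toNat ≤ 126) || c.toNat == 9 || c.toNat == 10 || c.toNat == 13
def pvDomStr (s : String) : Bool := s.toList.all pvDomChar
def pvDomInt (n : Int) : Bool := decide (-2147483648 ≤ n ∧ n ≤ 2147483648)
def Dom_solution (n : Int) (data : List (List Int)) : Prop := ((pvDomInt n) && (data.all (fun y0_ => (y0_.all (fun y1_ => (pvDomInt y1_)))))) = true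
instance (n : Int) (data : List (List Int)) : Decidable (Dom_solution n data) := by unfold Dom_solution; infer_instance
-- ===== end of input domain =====

-- B replaces A's in-place grid-mutating stack DFS flood fill by the classic iterative
-- connected-component-labelling algorithm: every 1-cell starts with its own index,
-- zigzag sweeps replace each label by the minimum over itself and its free neighbours
-- until a fixpoint, and sizes are counted per distinct label (objective: alternative).
-- A mutates `data` in place (every 1 becomes 2), B does not — the equivalence proved
-- here is about the RETURN value only.

-- ===== PORT A =====
-- data[x][y], totalized with a default: Pre_solution excludes the inputs where the Python read raises
def pvVal (g : List (List Int)) (x y : Int) : Int :=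
  (PySem.List.pyGet? ((PySem.List.pyGet? g x).getD []) y).getD 0

-- data[x][y] = 2
def pvSet2 (g : List (List Int)) (x y : Int) : List (List Int) :=
  PySem.List.pySetD g x (PySem.List.pySetD (PySem.List.pyGetD g x []) y 2)

-- number of 1-cells of the grid (termination measure only)
def pvOnes (g : List (List Int)) : Nat := (g.map (fun r => r.count 1)).sum

def pvDx : List Int := [1, 0, -1, 0]
def pvDy : List Int := [0, -1, 0, 1]

-- one neighbour test/push of A's inner `for d in range(4)` loop
def pvA1 (n : Int) (st : List (List Int) × List (Int × Int)) (c : Int × Int) :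
    List (List Int) × List (Int × Int) :=
  if 0 ≤ c.1 ∧ c.1 < n ∧ 0 ≤ c.2 ∧ c.2 < n ∧ pvVal st.1 c.1 c.2 = 1 then
    (pvSet2 st.1 c.1 c.2, st.2 ++ [c])
  else st

-- A's `for d in range(4)` loop: thread (data, S) through the four directions
def pvStepA (n x y : Int) (g : List (List Int)) (S : List (Int × Int)) :
    List (List Int) × List (Int × Int) :=
  (PySem.List.pyRange 0 4 1).foldl
    (fun st d =>
      let nx := x + PySem.List.pyGetD pvDx d 0
      let ny := y + PySem.List.pyGetD pvDy d 0
      pvA1 n st (nx, ny)) (g, S)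

lemma pvSumSet (l : List Nat) (i : Nat) (h : i < l.length) (b : Nat) : (l.set i b).sum + l[i] = l.sum + b := by
  induction l generalizing i with
  | nil => simp at h
  | cons a l ih =>
    cases i with
    | zero => simp [List.set]; omega
    | succ k => simp only [List.set, List.sum_cons]; have := ih k (by simpa using h); simp at this ⊢; omega

lemma pvCountSet (row : List Int) (j : Nat) (h : j < row.length) (h1 : row[j] = 1) : (row.set j 2).count 1 + 1 = row.count 1 := by
  induction row generalizing j with
  | nil => simp at h
  | cons a l ih =>
    cases j with
    | zero => simp_all [List.set]
    | succ k =>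
      simp only [List.set, List.count_cons]
      have := ih k (by simpa using h) (by simpa using h1)
      omega

-- the shape facts behind a successful read: pvVal g x y = 1 with nonneg coords
lemma pvVal_shape (g : List (List Int)) (x y : Int) (hx : 0 ≤ x) (hy : 0 ≤ y)
    (h1 : pvVal g x y = 1) :
    ∃ (hxl : x.toNat < g.length) (hyl : y.toNat < g[x.toNat].length), g[x.toNat][y.toNat] = 1 := by
  unfold pvVal at h1
  rw [PySem.List.pyGet?_of_nonneg g hx] at h1
  rcases hgl : g[x.toNat]? with _ | row
  · rw [hgl] at h1; simp [PySem.List.pyGet?] at h1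
  · rw [hgl] at h1
    have hxl : x.toNat < g.length := by have := List.getElem?_eq_some_iff.mp hgl; exact this.1
    have hrow : g[x.toNat] = row := by simpa [List.getElem?_eq_getElem hxl] using hgl
    simp only [Option.getD_some] at h1
    rw [PySem.List.pyGet?_of_nonneg row hy] at h1
    rcases hrl : row[y.toNat]? with _ | v
    · rw [hrl] at h1; simp at h1
    · rw [hrl] at h1
      have hyl : y.toNat < row.length := by have := List.getElem?_eq_some_iff.mp hrl; exact this.1
      have : row[y.toNat] = v := by simpa [List.getElem?_eq_getElem hyl] using hrl
      subst hrow
      exact ⟨hxl, hyl, by simp_all⟩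

lemma pvSet2_eq (g : List (List Int)) (x y : Int) (hx : 0 ≤ x) (hy : 0 ≤ y)
    (h1 : pvVal g x y = 1) :
    pvSet2 g x y = g.set x.toNat (g[x.toNat]!.set y.toNat 2) := by
  obtain ⟨hxl, hyl, _⟩ := pvVal_shape g x y hx hy h1
  unfold pvSet2
  rw [PySem.List.pyGetD_eq_getElem g [] hx (by omega)]
  rw [PySem.List.pySetD_of_nonneg _ _ hy, PySem.List.pySetD_of_nonneg _ _ hx,
    getElem!_pos g x.toNat hxl]

lemma pvOnes_set2 (g : List (List Int)) (x y : Int) (hx : 0 ≤ x) (hy : 0 ≤ y)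
    (h1 : pvVal g x y = 1) : pvOnes (pvSet2 g x y) + 1 = pvOnes g := by
  obtain ⟨hxl, hyl, hone⟩ := pvVal_shape g x y hx hy h1
  rw [pvSet2_eq g x y hx hy h1]
  unfold pvOnes
  rw [getElem!_pos g x.toNat hxl, List.map_set]
  have hs := pvSumSet (g.map (fun r => r.count 1)) x.toNat (by simpa using hxl) ((g[x.toNat].set y.toNat 2).count 1)
  have hc := pvCountSet g[x.toNat] y.toNat hyl hone
  simp only [List.getElem_map] at hs
  omega

lemma pvA1_measure (n : Int) (st : List (List Int) × List (Int × Int)) (c : Int × Int) :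
    2 * pvOnes (pvA1 n st c).1 + (pvA1 n st c).2.length ≤ 2 * pvOnes st.1 + st.2.length := by
  unfold pvA1
  split_ifs with h
  · have := pvOnes_set2 st.1 c.1 c.2 h.1 h.2.2.1 h.2.2.2.2
    simp only [List.length_append, List.length_cons, List.length_nil]
    omega
  · omega

lemma pvStepA_measure (n x y : Int) (g : List (List Int)) (S : List (Int × Int)) :
    2 * pvOnes (pvStepA n x y g S).1 + (pvStepA n x y g S).2.length ≤
      2 * pvOnes g + S.length := by
  unfold pvStepA
  generalize PySem.List.pyRange 0 4 1 = ds
  induction ds generalizing g S with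
  | nil => simp
  | cons d ds ih =>
    simp only [List.foldl_cons]
    refine le_trans ?_ (pvA1_measure n (g, S) (x + PySem.List.pyGetD pvDx d 0, y + PySem.List.pyGetD pvDy d 0))
    exact ih _ _

-- A's `while S` loop: S.pop() from the end, count the pops, mark-and-push neighbours
def pvFloodA (n : Int) (g : List (List Int)) (S : List (Int × Int)) (count : Int) :
    List (List Int) × Int :=
  match hp : PySem.List.pop? S (-1) with
  | none => (g, count)
  | some (xy, S0) =>
    let st := pvStepA n xy.1 xy.2 g S0
    pvFloodA n st.1 st.2 (count + 1)
termination_by 2 * pvOnes g + S.length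
decreasing_by
  have hlen : S0.length + 1 = S.length := PySem.List.length_of_pop?_eq_some S hp
  have := pvStepA_measure n xy.1 xy.2 g S0
  omega

def solution (n : Int) (data : List (List Int)) : String :=
  let st := (PySem.List.pyRange 0 n 1).foldl
    (fun (st : List (List Int) × List Int) i =>
      (PySem.List.pyRange 0 n 1).foldl
        (fun st j =>
          if pvVal st.1 i j = 1 then
            let g1 := pvSet2 st.1 i j
            let r := pvFloodA n g1 [(i, j)] 0
            (r.1, st.2 ++ [r.2])
          else st) st) (data, [])
  let result := PySem.List.sorted st.2 (fun x => x) false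
  PySem.Int.toStr (PySem.List.len result) ++ "\n" ++
    PySem.Str.join "\n" (result.map PySem.Int.toStr)

-- ===== PORT B =====
-- label[i][j] = v  (B only ever writes in-range cells of its own n×n grid)
def pvSetV (g : List (List Int)) (x y v : Int) : List (List Int) :=
  PySem.List.pySetD g x (PySem.List.pySetD (PySem.List.pyGetD g x []) y v)

-- the initial label grid: [[i*n+j if data[i][j]==1 else -1 …] …]
def pvInitL (n : Int) (data : List (List Int)) : List (List Int) :=
  (PySem.List.pyRange 0 n 1).map (fun i =>
    (PySem.List.pyRange 0 n 1).map (fun j =>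
      if pvVal data i j = 1 then i * n + j else -1))

-- B's helper `relax(i, j)`: min over itself and its in-range free neighbours
def pvRelax (n i j : Int) (L : List (List Int)) : List (List Int) × Bool :=
  let m0 := pvVal L i j
  let m1 := if i + 1 < n ∧ pvVal L (i + 1) j ≠ -1 then min m0 (pvVal L (i + 1) j) else m0
  let m2 := if 0 < i ∧ pvVal L (i - 1) j ≠ -1 then min m1 (pvVal L (i - 1) j) else m1
  let m3 := if j + 1 < n ∧ pvVal L i (j + 1) ≠ -1 then min m2 (pvVal L i (j + 1)) else m2
  let m4 := if 0 < j ∧ pvVal L i (j - 1) ≠ -1 then min m3 (pvVal L i (j - 1)) else m3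
  if m4 < pvVal L i j then (pvSetV L i j m4, true) else (L, false)

-- `if label[i][j] != -1 and relax(i, j): changed = True`
def pvCell (n : Int) (st : List (List Int) × Bool) (c : Int × Int) :
    List (List Int) × Bool :=
  if pvVal st.1 c.1 c.2 ≠ -1 then
    let r := pvRelax n c.1 c.2 st.1
    (r.1, st.2 || r.2)
  else st

-- one double `for` sweep over the rows `is` and columns `js`
def pvSweep (n : Int) (is js : List Int) (st : List (List Int) × Bool) :
    List (List Int) × Bool :=
  is.foldl (fun st i => js.foldl (fun st j => pvCell n st (i, j)) st) st

-- one body of the `while changed` loop: forward sweep then backward sweep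
def pvRound (n : Int) (L : List (List Int)) : List (List Int) × Bool :=
  pvSweep n (PySem.List.pyRange 0 n 1).reverse (PySem.List.pyRange 0 n 1).reverse
    (pvSweep n (PySem.List.pyRange 0 n 1) (PySem.List.pyRange 0 n 1) (L, false))

-- fuel measure: the while loop strictly decreases it (proved below); the fuel
-- passed by solution_alt is provably sufficient, so the guard never fires
def pvMu (L : List (List Int)) : Nat :=
  (L.map (fun r => (r.map (fun x => (x + 1).toNat)).sum)).sum

-- `while changed:` (fuel only totalizes the identical computation)
def pvLoop (n : Int) (fuel : Nat) (L : List (List Int)) : List (List Int) :=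
  match fuel with
  | 0 => L
  | fuel + 1 =>
    let r := pvRound n L
    if r.2 then pvLoop n fuel r.1 else r.1

def solution_alt (n : Int) (data : List (List Int)) : String :=
  let L0 := pvInitL n data
  let L := pvLoop n (pvMu L0 + 1) L0
  let flat := (PySem.List.pyRange 0 n 1).flatMap (fun i =>
    ((PySem.List.pyRange 0 n 1).filter (fun j => pvVal L i j != -1)).map
      (fun j => pvVal L i j))
  let roots := PySem.List.sorted (PySem.Set.ofList flat) (fun x => x) false
  let sizes := PySem.List.sorted (roots.map (fun r => (PySem.List.count flat r : Int)))
    (fun x => x) false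
  PySem.Int.toStr (PySem.List.len roots) ++ "\n" ++
    PySem.Str.join "\n" (sizes.map PySem.Int.toStr)

-- ===== PRECONDITION & SPEC =====
-- Pre_ excludes exactly the inputs on which the Python A raises IndexError:
-- the outer loops read data[i][j] for all 0 ≤ i, j < n, so the first n rows must exist
-- and have length at least n (all other reads/writes are bounds-checked to [0,n)²).
def Pre_solution (n : Int) (data : List (List Int)) : Prop :=
  n ≤ (data.length : Int) ∧ ∀ row ∈ data.take n.toNat, n ≤ (row.length : Int)
instance (n : Int) (data : List (List Int)) : Decidable (Pre_solution n data) := by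
  unfold Pre_solution; infer_instance

def pvWitness_solution : Int × List (List Int) := (2, [[1, 0], [0, 1]])

def Spec_solution (n : Int) (data : List (List Int)) (out : String) : Prop := out = solution_alt n data
instance (n : Int) (data : List (List Int)) (out : String) : Decidable (Spec_solution n data out) := by unfold Spec_solution; infer_instance

-- ===== CLAIM (what is proved, stated in full; the proofs are below) =====
def Claim_equal_solution : Prop := ∀ (n : Int) (data : List (List Int)), Dom_solution n data → Pre_solution n data → Spec_solution n data (solution n data)

-- ===== LEMMAS AND PROOFS =====

def pvIn (n : Int) (c : Int × Int) : Prop := 0 ≤ c.1 ∧ c.1 < n ∧ 0 ≤ c.2 ∧ c.2 < n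
def pvF (n : Int) (data : List (List Int)) (c : Int × Int) : Prop := pvIn n c ∧ pvVal data c.1 c.2 = 1
def pvNbr (c : Int × Int) : List (Int × Int) := [(c.1+1,c.2),(c.1,c.2-1),(c.1-1,c.2),(c.1,c.2+1)]
def pvAdj (n : Int) (data : List (List Int)) (a b : Int × Int) : Prop := pvF n data a ∧ pvF n data b ∧ b ∈ pvNbr a
def pvConn (n : Int) (data : List (List Int)) : (Int × Int) → (Int × Int) → Prop := Relation.ReflTransGen (pvAdj n data)
def pvIdx (n : Int) (c : Int × Int) : Int := c.1 * n + c.2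
def pvSeed (n : Int) (data : List (List Int)) (s : Int × Int) : Prop :=
  pvF n data s ∧ ∀ c, pvConn n data s c → pvIdx n s ≤ pvIdx n c
def pvComp (n : Int) (data : List (List Int)) (s : Int × Int) : Set (Int × Int) := {c | pvConn n data s c}

lemma pvNbr_symm (a b : Int × Int) : a ∈ pvNbr b ↔ b ∈ pvNbr a := by
  simp [pvNbr, Prod.ext_iff]; omega

lemma pvAdj_symm (n : Int) (data : List (List Int)) : Symmetric (pvAdj n data) := by
  intro a b ⟨ha, hb, hn⟩; exact ⟨hb, ha, (pvNbr_symm a b).mpr hn⟩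

lemma pvConn_symm {n : Int} {data : List (List Int)} {a b : Int × Int}
    (h : pvConn n data a b) : pvConn n data b a :=
  (Relation.ReflTransGen.symmetric (pvAdj_symm n data)) h

lemma pvConn_F {n : Int} {data : List (List Int)} {a b : Int × Int}
    (h : pvConn n data a b) (ha : pvF n data a) : pvF n data b := by
  induction h with
  | refl => exact ha
  | tail _ hadj _ => exact hadj.2.1

lemma pvComp_finite (n : Int) (data : List (List Int)) (s : Int × Int) (hs : pvF n data s) :
    (pvComp n data s).Finite := by
  apply Set.Finite.subset (Set.finite_Icc ((0 : Int), (0 : Int)) (n - 1, n - 1))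
  intro c hc
  have := pvConn_F hc hs
  simp only [Set.mem_Icc, Prod.le_def]
  obtain ⟨⟨h1, h2, h3, h4⟩, _⟩ := this
  constructor <;> constructor <;> omega

lemma pvIdx_lt {n : Int} {a b : Int × Int} (ha : pvIn n a) (hb : pvIn n b)
    (h : a.1 < b.1 ∨ (a.1 = b.1 ∧ a.2 < b.2)) : pvIdx n a < pvIdx n b := by
  obtain ⟨ha1, ha2, ha3, ha4⟩ := ha
  obtain ⟨hb1, hb2, hb3, hb4⟩ := hb
  unfold pvIdx
  rcases h with h | ⟨h1, h2⟩
  · nlinarith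
  · rw [h1]; omega

lemma pvIdx_inj {n : Int} {a b : Int × Int} (ha : pvIn n a) (hb : pvIn n b)
    (h : pvIdx n a = pvIdx n b) : a = b := by
  rcases lt_trichotomy a.1 b.1 with h1 | h1 | h1
  · exact absurd h (ne_of_lt (pvIdx_lt ha hb (Or.inl h1)))
  · rcases lt_trichotomy a.2 b.2 with h2 | h2 | h2
    · exact absurd h (ne_of_lt (pvIdx_lt ha hb (Or.inr ⟨h1, h2⟩)))
    · exact Prod.ext_iff.mpr ⟨h1, h2⟩
    · exact absurd h.symm (ne_of_lt (pvIdx_lt hb ha (Or.inr ⟨h1.symm, h2⟩)))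
  · exact absurd h.symm (ne_of_lt (pvIdx_lt hb ha (Or.inl h1)))

lemma pvSeed_exists {n : Int} {data : List (List Int)} {c : Int × Int} (hc : pvF n data c) :
    ∃ s, pvSeed n data s ∧ pvConn n data s c := by
  obtain ⟨s, hsK, hmin⟩ := Set.exists_min_image (pvComp n data c) (pvIdx n)
    (pvComp_finite n data c hc) ⟨c, Relation.ReflTransGen.refl⟩
  have hsc : pvConn n data c s := hsK
  refine ⟨s, ⟨pvConn_F hsc hc, ?_⟩, pvConn_symm hsc⟩
  intro x hx
  exact hmin x (Relation.ReflTransGen.trans hsc hx)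

lemma pvSeed_unique {n : Int} {data : List (List Int)} {s t : Int × Int}
    (hs : pvSeed n data s) (ht : pvSeed n data t) (h : pvConn n data s t) : s = t :=
  pvIdx_inj hs.1.1 ht.1.1 (le_antisymm (hs.2 t h) (ht.2 s (pvConn_symm h)))

noncomputable def pvSeedOf (n : Int) (data : List (List Int)) (c : Int × Int) : Int × Int :=
  @dite _ (∃ s, pvSeed n data s ∧ pvConn n data s c) (Classical.propDecidable _)
    (fun h => h.choose) (fun _ => c)

lemma pvSeedOf_spec {n : Int} {data : List (List Int)} {c : Int × Int} (hc : pvF n data c) :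
    pvSeed n data (pvSeedOf n data c) ∧ pvConn n data (pvSeedOf n data c) c := by
  unfold pvSeedOf
  rw [dif_pos (pvSeed_exists hc)]
  exact (pvSeed_exists hc).choose_spec

lemma pvSeedOf_eq {n : Int} {data : List (List Int)} {s c : Int × Int}
    (hs : pvSeed n data s) (h : pvConn n data s c) : pvSeedOf n data c = s := by
  have hc : pvF n data c := pvConn_F h hs.1
  obtain ⟨h1, h2⟩ := pvSeedOf_spec hc
  exact pvSeed_unique h1 hs (Relation.ReflTransGen.trans h2 (pvConn_symm h))

lemma pvSeedOf_iff {n : Int} {data : List (List Int)} {s c : Int × Int}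
    (hs : pvSeed n data s) (hc : pvF n data c) :
    pvSeedOf n data c = s ↔ pvConn n data s c := by
  constructor
  · intro h; rw [← h]; exact (pvSeedOf_spec hc).2
  · exact pvSeedOf_eq hs

def pvCells (n : Int) : List (Int × Int) :=
  (PySem.List.pyRange 0 n 1).flatMap (fun i => (PySem.List.pyRange 0 n 1).map (fun j => (i, j)))

lemma mem_pvCells {n : Int} {c : Int × Int} : c ∈ pvCells n ↔ pvIn n c := by
  unfold pvCells pvIn
  simp only [List.mem_flatMap, List.mem_map, PySem.List.mem_pyRange_one]
  constructor
  · rintro ⟨i, hi, j, hj, rfl⟩; exact ⟨hi.1, hi.2, hj.1, hj.2⟩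
  · rintro ⟨h1, h2, h3, h4⟩; exact ⟨c.1, ⟨h1, h2⟩, c.2, ⟨h3, h4⟩, rfl⟩

lemma pvCells_pairwise (n : Int) : (pvCells n).Pairwise (fun a b => pvIdx n a < pvIdx n b) := by
  unfold pvCells
  rw [List.pairwise_flatMap]
  constructor
  · intro i _
    refine List.Pairwise.map _ ?_ (PySem.List.pairwise_lt_pyRange_one 0 n)
    intro j j' hj
    unfold pvIdx
    simp only
    omega
  · have h := (PySem.List.pairwise_lt_pyRange_one 0 n)
    rw [List.Pairwise.and_mem] at h
    refine h.imp ?_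
    rintro i i' ⟨hi, hi', hlt⟩
    rw [PySem.List.mem_pyRange_one] at hi hi'
    intro x hx y hy
    rw [List.mem_map] at hx hy
    obtain ⟨j, hj, rfl⟩ := hx
    obtain ⟨j', hj', rfl⟩ := hy
    rw [PySem.List.mem_pyRange_one] at hj hj'
    exact pvIdx_lt (a := (i, j)) (b := (i', j'))
      ⟨hi.1, hi.2, hj.1, hj.2⟩ ⟨hi'.1, hi'.2, hj'.1, hj'.2⟩ (Or.inl hlt)

lemma pvCells_nodup (n : Int) : (pvCells n).Nodup :=
  (pvCells_pairwise n).imp (fun h => by intro he; rw [he] at h; exact lt_irrefl _ h)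

lemma pvCells_prefix {n : Int} {P Q : List (Int × Int)} {c m : Int × Int}
    (h : pvCells n = P ++ c :: Q) (hm : pvIn n m) (hlt : pvIdx n m < pvIdx n c) : m ∈ P := by
  have hmem : m ∈ P ++ c :: Q := by rw [← h]; exact mem_pvCells.mpr hm
  rcases List.mem_append.mp hmem with hP | hQ
  · exact hP
  · exfalso
    have hpw := pvCells_pairwise n
    rw [h] at hpw
    have h2 := (List.pairwise_append.mp hpw).2.1
    rcases List.mem_cons.mp hQ with rfl | hQ'
    · exact lt_irrefl _ hlt
    · have := (List.pairwise_cons.mp h2).1 m hQ'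
      omega


-- ===== A-side: characterizing the flood fill =====

-- cells reachable from the pending list S by steps into `free` cells
inductive pvReach (free : Int × Int → Prop) (S : List (Int × Int)) : (Int × Int) → Prop
  | base {s c} : s ∈ S → c ∈ pvNbr s → free c → pvReach free S c
  | step {b c} : pvReach free S b → c ∈ pvNbr b → free c → pvReach free S c

lemma pvReach_free {free : (Int × Int) → Prop} {S : List (Int × Int)} {c : Int × Int}
    (h : pvReach free S c) : free c := by
  cases h <;> assumption

lemma pvReach_nil {free : (Int × Int) → Prop} {c : Int × Int} (h : pvReach free [] c) : False := by
  induction h with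
  | base hs => simp at hs
  | step _ _ _ ih => exact ih

lemma pvNbr_nodup (c : Int × Int) : (pvNbr c).Nodup := by
  simp [pvNbr, Prod.ext_iff]
  omega

-- popping x from the pending list and enqueueing its free neighbours N
-- does not change the reachable set
lemma pvReach_pop {free free' : Int × Int → Prop} {S S' N : List (Int × Int)} {x : Int × Int}
    (hx : x ∈ S)
    (hN : ∀ c, c ∈ N ↔ c ∈ pvNbr x ∧ free c)
    (hf' : ∀ c, free' c ↔ free c ∧ c ∉ N)
    (hS1 : ∀ s ∈ S, s = x ∨ s ∈ S')
    (hS2 : ∀ s ∈ S', s ∈ S ∨ s ∈ N)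
    (hNS : ∀ c ∈ N, c ∈ S') :
    ∀ c, pvReach free S c ↔ (c ∈ N ∨ pvReach free' S' c) := by
  intro c
  constructor
  · intro h
    induction h with
    | @base s c hs hn hc =>
      by_cases hcN : c ∈ N
      · exact Or.inl hcN
      · rcases hS1 s hs with rfl | hs'
        · exact absurd ((hN c).mpr ⟨hn, hc⟩) hcN
        · exact Or.inr (pvReach.base hs' hn ((hf' c).mpr ⟨hc, hcN⟩))
    | @step b c hb hn hc ih =>
      by_cases hcN : c ∈ N
      · exact Or.inl hcN
      · have hc' : free' c := (hf' c).mpr ⟨hc, hcN⟩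
        rcases ih with hbN | hb'
        · exact Or.inr (pvReach.base (hNS b hbN) hn hc')
        · exact Or.inr (pvReach.step hb' hn hc')
  · intro h
    rcases h with hcN | h
    · rcases (hN c).mp hcN with ⟨hn, hc⟩
      exact pvReach.base hx hn hc
    · induction h with
      | @base s c hs hn hc =>
        have hc' : free c := ((hf' c).mp hc).1
        rcases hS2 s hs with hsS | hsN
        · exact pvReach.base hsS hn hc'
        · rcases (hN s).mp hsN with ⟨hsn, hsf⟩
          exact pvReach.step (pvReach.base hx hsn hsf) hn hc'
      | @step b c hb hn hc ih => exact pvReach.step ih hn ((hf' c).mp hc).1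

lemma pvF_finite (n : Int) (g : List (List Int)) : {c | pvF n g c}.Finite := by
  apply Set.Finite.subset (Set.finite_Icc ((0 : Int), (0 : Int)) (n - 1, n - 1))
  intro c hc
  simp only [pvF, pvIn, Set.mem_setOf_eq] at hc
  simp only [Set.mem_Icc, Prod.le_def]
  obtain ⟨⟨h1, h2, h3, h4⟩, _⟩ := hc
  constructor <;> constructor <;> omega

lemma pvReach_finite {free : Int × Int → Prop} {S : List (Int × Int)}
    (hfin : {c | free c}.Finite) : {c | pvReach free S c}.Finite :=
  hfin.subset (fun _ h => pvReach_free h)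

lemma pvNcard_split {N : List (Int × Int)} {R' : Set (Int × Int)}
    (hnd : N.Nodup) (hfin : R'.Finite) (hdisj : ∀ c ∈ N, c ∉ R') :
    ({c | c ∈ N} ∪ R').ncard = N.length + R'.ncard := by
  have h1 : {c : Int × Int | c ∈ N} = ↑N.toFinset := by ext c; simp
  rw [h1, Set.ncard_union_eq (by rw [Set.disjoint_left]; intro a ha; exact hdisj a (by simpa using ha))
    (N.toFinset.finite_toSet) hfin, Set.ncard_coe_finset, List.toFinset_card_of_nodup hnd]

-- the value of a cell after data[x][y] = 2
lemma pvVal_set2 (g : List (List Int)) (x y x' y' : Int) (hx : 0 ≤ x) (hy : 0 ≤ y)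
    (hx' : 0 ≤ x') (hy' : 0 ≤ y') (h1 : pvVal g x y = 1) :
    pvVal (pvSet2 g x y) x' y' = if x' = x ∧ y' = y then 2 else pvVal g x' y' := by
  obtain ⟨hxl, hyl, hone⟩ := pvVal_shape g x y hx hy h1
  rw [pvSet2_eq g x y hx hy h1, getElem!_pos g x.toNat hxl]
  unfold pvVal
  rw [PySem.List.pyGet?_of_nonneg _ hx', PySem.List.pyGet?_of_nonneg g hx']
  rw [List.getElem?_set]
  by_cases hxx : x' = x
  · have : x.toNat = x'.toNat := by omega
    rw [if_pos this, if_pos (this ▸ hxl)]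
    simp only [Option.getD_some]
    rw [PySem.List.pyGet?_of_nonneg _ hy', PySem.List.pyGet?_of_nonneg _ hy']
    rw [List.getElem?_set]
    by_cases hyy : y' = y
    · have hyn : y.toNat = y'.toNat := by omega
      rw [if_pos hyn, if_pos (hyn ▸ hyl), if_pos ⟨hxx, hyy⟩]
      simp
    · have hyn : ¬ (y.toNat = y'.toNat) := by omega
      rw [if_neg hyn, if_neg (by tauto)]
      have : g[x'.toNat]? = some g[x.toNat] := by
        rw [List.getElem?_eq_some_iff]; exact ⟨this ▸ hxl, by congr 1; omega⟩
      rw [this]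
      simp
  · have hxn : ¬ (x.toNat = x'.toNat) := by omega
    rw [if_neg hxn, if_neg (by tauto)]

lemma pvStepA_eq (n x y : Int) (g : List (List Int)) (S : List (Int × Int)) :
    pvStepA n x y g S = (pvNbr (x, y)).foldl (pvA1 n) (g, S) := by
  have hr : PySem.List.pyRange 0 4 1 = [0, 1, 2, 3] := by decide
  have h0 : PySem.List.pyGetD pvDx (0 : Int) 0 = 1 := by decide
  have h1 : PySem.List.pyGetD pvDx (1 : Int) 0 = 0 := by decide
  have h2 : PySem.List.pyGetD pvDx (2 : Int) 0 = -1 := by decide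
  have h3 : PySem.List.pyGetD pvDx (3 : Int) 0 = 0 := by decide
  have k0 : PySem.List.pyGetD pvDy (0 : Int) 0 = 0 := by decide
  have k1 : PySem.List.pyGetD pvDy (1 : Int) 0 = -1 := by decide
  have k2 : PySem.List.pyGetD pvDy (2 : Int) 0 = 0 := by decide
  have k3 : PySem.List.pyGetD pvDy (3 : Int) 0 = 1 := by decide
  simp only [pvStepA, hr, List.foldl_cons, List.foldl_nil, pvNbr,
    h0, h1, h2, h3, k0, k1, k2, k3, add_zero, ← sub_eq_add_neg]

lemma pvF_iff (n : Int) (g : List (List Int)) (c : Int × Int) :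
    pvF n g c ↔ (0 ≤ c.1 ∧ c.1 < n ∧ 0 ≤ c.2 ∧ c.2 < n ∧ pvVal g c.1 c.2 = 1) := by
  unfold pvF pvIn; tauto

lemma pvFoldA_spec (n : Int) : ∀ (cs : List (Int × Int)) (g : List (List Int))
    (S : List (Int × Int)), cs.Nodup →
    ∃ N : List (Int × Int),
      (cs.foldl (pvA1 n) (g, S)).2 = S ++ N ∧ N.Nodup ∧
      (∀ c, c ∈ N ↔ c ∈ cs ∧ pvF n g c) ∧
      (∀ c, c ∈ N → pvVal (cs.foldl (pvA1 n) (g, S)).1 c.1 c.2 = 2) ∧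
      (∀ c : Int × Int, 0 ≤ c.1 → 0 ≤ c.2 → c ∉ N →
        pvVal (cs.foldl (pvA1 n) (g, S)).1 c.1 c.2 = pvVal g c.1 c.2) := by
  intro cs
  induction cs with
  | nil =>
    intro g S _
    exact ⟨[], by simp, by simp, by simp, by simp, by simp⟩
  | cons c0 cs ih =>
    intro g S hnd
    obtain ⟨hc0, hnds⟩ := List.nodup_cons.mp hnd
    simp only [List.foldl_cons]
    by_cases hacc : 0 ≤ c0.1 ∧ c0.1 < n ∧ 0 ≤ c0.2 ∧ c0.2 < n ∧ pvVal g c0.1 c0.2 = 1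
    · have hA1 : pvA1 n (g, S) c0 = (pvSet2 g c0.1 c0.2, S ++ [c0]) := by
        unfold pvA1; rw [if_pos hacc]
      rw [hA1]
      obtain ⟨N', h2, hnd', hmem, hval2, hvalu⟩ := ih (pvSet2 g c0.1 c0.2) (S ++ [c0]) hnds
      have hvg1 : ∀ c : Int × Int, 0 ≤ c.1 → 0 ≤ c.2 →
          pvVal (pvSet2 g c0.1 c0.2) c.1 c.2 =
            if c.1 = c0.1 ∧ c.2 = c0.2 then 2 else pvVal g c.1 c.2 :=
        fun c ha hb =>
          pvVal_set2 g c0.1 c0.2 c.1 c.2 hacc.1 hacc.2.2.1 ha hb hacc.2.2.2.2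
      have hc0N' : c0 ∉ N' := fun h => hc0 ((hmem c0).mp h).1
      refine ⟨c0 :: N', by rw [h2]; simp, List.nodup_cons.mpr ⟨hc0N', hnd'⟩, ?_, ?_, ?_⟩
      · intro c
        constructor
        · intro h
          rcases List.mem_cons.mp h with rfl | hN'
          · exact ⟨List.mem_cons_self .., (pvF_iff n g c).mpr hacc⟩
          · obtain ⟨hcs, hfree1⟩ := (hmem c).mp hN'
            rw [pvF_iff] at hfree1
            have hne : ¬(c.1 = c0.1 ∧ c.2 = c0.2) := by
              intro hh
              have hceq : c = c0 := Prod.ext_iff.mpr ⟨hh.1, hh.2⟩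
              exact hc0 (hceq ▸ hcs)
            have := hvg1 c hfree1.1 hfree1.2.2.1
            rw [if_neg hne] at this
            refine ⟨List.mem_cons_of_mem _ hcs, (pvF_iff n g c).mpr ⟨hfree1.1, hfree1.2.1, hfree1.2.2.1, hfree1.2.2.2.1, ?_⟩⟩
            rw [← this]; exact hfree1.2.2.2.2
        · rintro ⟨hcs, hfree⟩
          rw [pvF_iff] at hfree
          rcases List.mem_cons.mp hcs with rfl | hcs'
          · exact List.mem_cons_self ..
          · have hne : c ≠ c0 := fun h => hc0 (h ▸ hcs')
            have hne' : ¬(c.1 = c0.1 ∧ c.2 = c0.2) := by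
              intro hh; exact hne (Prod.ext_iff.mpr ⟨hh.1, hh.2⟩)
            refine List.mem_cons_of_mem _ ((hmem c).mpr ⟨hcs', (pvF_iff n _ c).mpr ⟨hfree.1, hfree.2.1, hfree.2.2.1, hfree.2.2.2.1, ?_⟩⟩)
            rw [hvg1 c hfree.1 hfree.2.2.1, if_neg hne']
            exact hfree.2.2.2.2
      · intro c hc
        rcases List.mem_cons.mp hc with rfl | hN'
        · rw [hvalu c hacc.1 hacc.2.2.1 hc0N', hvg1 c hacc.1 hacc.2.2.1, if_pos ⟨rfl, rfl⟩]
        · exact hval2 c hN'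
      · intro c ha hb hc
        have hcN' : c ∉ N' := fun h => hc (List.mem_cons_of_mem _ h)
        have hne : c ≠ c0 := fun h => hc (h ▸ List.mem_cons_self ..)
        have hne' : ¬(c.1 = c0.1 ∧ c.2 = c0.2) := by
          intro hh; exact hne (Prod.ext_iff.mpr ⟨hh.1, hh.2⟩)
        rw [hvalu c ha hb hcN', hvg1 c ha hb, if_neg hne']
    · have hA1 : pvA1 n (g, S) c0 = (g, S) := by unfold pvA1; rw [if_neg hacc]
      rw [hA1]
      obtain ⟨N', h2, hnd', hmem, hval2, hvalu⟩ := ih g S hnds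
      refine ⟨N', h2, hnd', ?_, hval2, hvalu⟩
      intro c
      rw [hmem c]
      constructor
      · rintro ⟨hcs, hf⟩; exact ⟨List.mem_cons_of_mem _ hcs, hf⟩
      · rintro ⟨hcs, hf⟩
        rcases List.mem_cons.mp hcs with rfl | hcs'
        · exact absurd ((pvF_iff n g c).mp hf) hacc
        · exact ⟨hcs', hf⟩

lemma pvFloodA_nil (n : Int) (g : List (List Int)) (cnt : Int) :
    pvFloodA n g [] cnt = (g, cnt) := by
  rw [pvFloodA]
  split
  · rfl
  · rename_i xy S0 h
    rw [show PySem.List.pop? ([] : List (Int × Int)) (-1) = none from by decide] at h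
    cases h

lemma pvFloodA_concat (n : Int) (g : List (List Int)) (S0 : List (Int × Int)) (xy : Int × Int)
    (cnt : Int) :
    pvFloodA n g (S0 ++ [xy]) cnt =
      pvFloodA n (pvStepA n xy.1 xy.2 g S0).1 (pvStepA n xy.1 xy.2 g S0).2 (cnt + 1) := by
  rw [pvFloodA]
  split
  · rename_i hnone; rw [PySem.List.pop?_last] at hnone; cases hnone
  · rename_i xy' S0' hsome
    rw [PySem.List.pop?_last] at hsome
    obtain ⟨rfl, rfl⟩ := Prod.mk.injEq .. ▸ Option.some.inj hsome
    rfl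

lemma pvFloodA_char (n : Int) : ∀ (k : Nat) (g : List (List Int)) (S : List (Int × Int))
    (cnt : Int), 2 * pvOnes g + S.length ≤ k →
    (∀ c, pvReach (pvF n g) S c → pvVal (pvFloodA n g S cnt).1 c.1 c.2 = 2) ∧
    (∀ c : Int × Int, 0 ≤ c.1 → 0 ≤ c.2 → ¬ pvReach (pvF n g) S c →
      pvVal (pvFloodA n g S cnt).1 c.1 c.2 = pvVal g c.1 c.2) ∧
    (pvFloodA n g S cnt).2 = cnt + S.length + ({c | pvReach (pvF n g) S c}.ncard : Int) := by
  intro k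
  induction k using Nat.strong_induction_on with
  | _ k IH =>
    intro g S cnt hk
    rcases List.eq_nil_or_concat' S with rfl | ⟨S0, xy, rfl⟩
    · rw [pvFloodA_nil]
      refine ⟨fun c h => absurd h pvReach_nil, fun c _ _ _ => rfl, ?_⟩
      have hempty : {c | pvReach (pvF n g) ([] : List (Int × Int)) c} = ∅ := by
        ext c; exact ⟨fun h => pvReach_nil h, fun h => h.elim⟩
      simp [hempty]
    · rw [pvFloodA_concat]
      have hms := pvStepA_measure n xy.1 xy.2 g S0
      rw [pvStepA_eq]
      rw [pvStepA_eq] at hms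
      obtain ⟨N, h2, hndN, hmem, hval2, hvalu⟩ :=
        pvFoldA_spec n (pvNbr (xy.1, xy.2)) g S0 (pvNbr_nodup _)
      set st := (pvNbr (xy.1, xy.2)).foldl (pvA1 n) (g, S0) with hst
      have hklt : 2 * pvOnes st.1 + st.2.length < k := by
        simp only [List.length_append, List.length_cons, List.length_nil] at hk
        omega
      obtain ⟨IH1, IH2, IH3⟩ := IH _ hklt st.1 st.2 (cnt + 1) le_rfl
      have hf' : ∀ c, pvF n st.1 c ↔ pvF n g c ∧ c ∉ N := by
        intro c
        by_cases hcN : c ∈ N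
        · constructor
          · intro h
            rw [pvF_iff] at h
            rw [hval2 c hcN] at h
            exact absurd h.2.2.2.2 (by norm_num)
          · intro h; exact absurd hcN h.2
        · by_cases hOk : pvIn n c
          · have := hvalu c hOk.1 hOk.2.2.1 hcN
            unfold pvF
            rw [this]
            tauto
          · constructor
            · intro h; exact absurd h.1 hOk
            · intro h; exact absurd h.1.1 hOk
      have hnbr : pvNbr (xy.1, xy.2) = pvNbr xy := by simp [pvNbr]
      have hpop : ∀ c, pvReach (pvF n g) (S0 ++ [xy]) c ↔
          (c ∈ N ∨ pvReach (pvF n st.1) st.2 c) := by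
        apply pvReach_pop (x := xy)
        · simp
        · intro c; rw [hmem c, hnbr]
        · exact hf'
        · intro s hs
          rcases List.mem_append.mp hs with h | h
          · right; rw [h2]; exact List.mem_append_left _ h
          · left; simpa using h
        · intro s hs
          rw [h2] at hs
          rcases List.mem_append.mp hs with h | h
          · left; exact List.mem_append_left _ h
          · right; exact h
        · intro c hc
          rw [h2]
          exact List.mem_append_right _ hc
      have hNfree : ∀ c, c ∈ N → pvF n g c := fun c hc => ((hmem c).mp hc).2
      refine ⟨?_, ?_, ?_⟩
      · intro c hR
        rcases (hpop c).mp hR with hcN | hR'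
        · by_cases hR' : pvReach (pvF n st.1) st.2 c
          · exact IH1 c hR'
          · have hOk := (hNfree c hcN).1
            rw [IH2 c hOk.1 hOk.2.2.1 hR']
            exact hval2 c hcN
        · exact IH1 c hR'
      · intro c h1 h2' hnR
        have hcN : c ∉ N := fun h => hnR ((hpop c).mpr (Or.inl h))
        have hnR' : ¬ pvReach (pvF n st.1) st.2 c :=
          fun h => hnR ((hpop c).mpr (Or.inr h))
        rw [IH2 c h1 h2' hnR']
        exact hvalu c h1 h2' hcN
      · rw [IH3]
        have hlen2 : st.2.length = S0.length + N.length := by rw [h2]; simp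
        have hRU : {c | pvReach (pvF n g) (S0 ++ [xy]) c} =
            {c | c ∈ N} ∪ {c | pvReach (pvF n st.1) st.2 c} := by
          ext c
          rw [Set.mem_union]
          exact hpop c
        have hsplit : ({c | pvReach (pvF n g) (S0 ++ [xy]) c}).ncard =
            N.length + ({c | pvReach (pvF n st.1) st.2 c}).ncard := by
          rw [hRU]
          exact pvNcard_split hndN (pvReach_finite (pvF_finite n st.1))
            (fun c hc hR => ((hf' c).mp (pvReach_free hR)).2 hc)
        rw [hsplit, hlen2]
        simp only [List.length_append, List.length_cons, List.length_nil]
        push_cast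
        ring

-- ===== A-side: the scan invariant =====

-- the flat body of A's nested `for i / for j` loops
def pvBodyA (n : Int) (st : List (List Int) × List Int) (c : Int × Int) :
    List (List Int) × List Int :=
  if pvVal st.1 c.1 c.2 = 1 then
    let g1 := pvSet2 st.1 c.1 c.2
    let r := pvFloodA n g1 [c] 0
    (r.1, st.2 ++ [r.2])
  else st

lemma pvSolutionA (n : Int) (data : List (List Int)) :
    solution n data =
      PySem.Int.toStr (PySem.List.len (PySem.List.sorted
          (((pvCells n).foldl (pvBodyA n) (data, [])).2) (fun x => x) false)) ++ "\n" ++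
        PySem.Str.join "\n" ((PySem.List.sorted
          (((pvCells n).foldl (pvBodyA n) (data, [])).2) (fun x => x) false).map
            PySem.Int.toStr) := by
  have h : (PySem.List.pyRange 0 n 1).foldl
      (fun (st : List (List Int) × List Int) i =>
        (PySem.List.pyRange 0 n 1).foldl
          (fun st j =>
            if pvVal st.1 i j = 1 then
              let g1 := pvSet2 st.1 i j
              let r := pvFloodA n g1 [(i, j)] 0
              (r.1, st.2 ++ [r.2])
            else st) st) (data, []) = (pvCells n).foldl (pvBodyA n) (data, []) := by
    unfold pvCells
    rw [List.foldl_flatMap]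
    congr 1
    funext st i
    rw [List.foldl_map]
    rfl
  unfold solution
  rw [h]

-- cells whose component's seed has already been scanned (the cells A has set to 2)
def pvRem (n : Int) (data : List (List Int)) (P : List (Int × Int)) (c : Int × Int) : Prop :=
  ∃ s ∈ P, pvSeed n data s ∧ pvConn n data s c

lemma pvRem_closed {n : Int} {data : List (List Int)} {P : List (Int × Int)} {x y : Int × Int}
    (h : pvRem n data P x) (hxy : pvConn n data x y) : pvRem n data P y := by
  obtain ⟨s, hsP, hs, hsx⟩ := h
  exact ⟨s, hsP, hs, Relation.ReflTransGen.trans hsx hxy⟩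

lemma pvRem_append {n : Int} {data : List (List Int)} {P : List (Int × Int)} {c x : Int × Int} :
    pvRem n data (P ++ [c]) x ↔ pvRem n data P x ∨ (pvSeed n data c ∧ pvConn n data c x) := by
  unfold pvRem
  constructor
  · rintro ⟨s, hsP, hs, hsx⟩
    rcases List.mem_append.mp hsP with h | h
    · exact Or.inl ⟨s, h, hs, hsx⟩
    · rcases List.mem_singleton.mp h with rfl
      exact Or.inr ⟨hs, hsx⟩
  · rintro (⟨s, hsP, hs, hsx⟩ | ⟨hs, hsx⟩)
    · exact ⟨s, List.mem_append_left _ hsP, hs, hsx⟩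
    · exact ⟨c, List.mem_append_right _ (List.mem_singleton_self c), hs, hsx⟩

-- grid values after the components of the seeds in P have been flooded
def pvInvA (n : Int) (data : List (List Int)) (P : List (Int × Int))
    (g : List (List Int)) : Prop :=
  ∀ c : Int × Int, pvIn n c →
    (pvRem n data P c → pvVal g c.1 c.2 = 2) ∧
    (¬ pvRem n data P c → pvVal g c.1 c.2 = pvVal data c.1 c.2)

-- the seeds of a cell list, in order (proof-side only; classical filter)
noncomputable def pvSeedF (n : Int) (data : List (List Int)) (l : List (Int × Int)) :
    List (Int × Int) :=
  l.filter (fun c => @decide (pvSeed n data c) (Classical.propDecidable _))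

lemma pvSeedF_nil (n : Int) (data : List (List Int)) : pvSeedF n data [] = [] := rfl

lemma pvSeedF_cons_pos {n : Int} {data : List (List Int)} {c : Int × Int}
    (l : List (Int × Int)) (h : pvSeed n data c) :
    pvSeedF n data (c :: l) = c :: pvSeedF n data l := by
  unfold pvSeedF
  rw [List.filter_cons]
  rw [if_pos (@decide_eq_true _ (Classical.propDecidable _) h)]

lemma pvSeedF_cons_neg {n : Int} {data : List (List Int)} {c : Int × Int}
    (l : List (Int × Int)) (h : ¬ pvSeed n data c) :
    pvSeedF n data (c :: l) = pvSeedF n data l := by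
  unfold pvSeedF
  rw [List.filter_cons]
  rw [if_neg (fun hd => h (@of_decide_eq_true _ (Classical.propDecidable _) hd))]

-- an unremoved 1-cell met by the scan is the seed of its component
lemma pvSeed_of_first {n : Int} {data : List (List Int)} {P Q : List (Int × Int)}
    {c : Int × Int} (h : pvCells n = P ++ c :: Q) (hcF : pvF n data c)
    (hnR : ¬ pvRem n data P c) : pvSeed n data c := by
  obtain ⟨hs, hsc⟩ := pvSeedOf_spec hcF
  by_cases he : pvSeedOf n data c = c
  · rw [he] at hs; exact hs
  · exfalso
    have hlt : pvIdx n (pvSeedOf n data c) < pvIdx n c := by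
      have hle := hs.2 c hsc
      rcases lt_or_eq_of_le hle with h' | h'
      · exact h'
      · exact absurd (pvIdx_inj hs.1.1 hcF.1 h') he
    have hmem : pvSeedOf n data c ∈ P := pvCells_prefix h hs.1.1 hlt
    exact hnR ⟨_, hmem, hs, hsc⟩

-- the set a single flood removes is exactly the component of its seed
lemma pvReach_eq_conn {n : Int} {data g : List (List Int)} {P : List (Int × Int)}
    {c : Int × Int} (hInv : pvInvA n data P g) (hcF : pvF n data c)
    (hnR : ¬ pvRem n data P c) :
    (∀ x, pvF n (pvSet2 g c.1 c.2) x ↔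
        (pvF n data x ∧ ¬ pvRem n data P x ∧ x ≠ c)) ∧
    (∀ x, pvReach (pvF n (pvSet2 g c.1 c.2)) [c] x ↔ (pvConn n data c x ∧ x ≠ c)) := by
  have hval1 : pvVal g c.1 c.2 = 1 := by
    rw [(hInv c hcF.1).2 hnR]; exact hcF.2
  have hfree : ∀ x, pvF n (pvSet2 g c.1 c.2) x ↔
      (pvF n data x ∧ ¬ pvRem n data P x ∧ x ≠ c) := by
    intro x
    by_cases hx : pvIn n x
    · have hv := pvVal_set2 g c.1 c.2 x.1 x.2 hcF.1.1 hcF.1.2.2.1 hx.1 hx.2.2.1 hval1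
      unfold pvF
      rw [hv]
      by_cases hxc : x = c
      · subst hxc
        rw [if_pos ⟨rfl, rfl⟩]
        constructor
        · rintro ⟨_, h⟩; norm_num at h
        · rintro ⟨_, _, h⟩; exact absurd rfl h
      · rw [if_neg (fun hh => hxc (Prod.ext_iff.mpr ⟨hh.1, hh.2⟩))]
        by_cases hrem : pvRem n data P x
        · rw [(hInv x hx).1 hrem]
          constructor
          · rintro ⟨_, h⟩; norm_num at h
          · rintro ⟨_, h, _⟩; exact absurd hrem h
        · rw [(hInv x hx).2 hrem]
          constructor
          · rintro ⟨_, h⟩; exact ⟨⟨hx, h⟩, hrem, hxc⟩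
          · rintro ⟨⟨_, h⟩, _, _⟩; exact ⟨hx, h⟩
    · constructor
      · intro h; exact absurd h.1 hx
      · rintro ⟨h, _, _⟩; exact absurd h.1 hx
  refine ⟨hfree, fun x => ⟨?_, ?_⟩⟩
  · intro h
    induction h with
    | @base s x hs hnbr hx =>
      rcases List.mem_singleton.mp hs with rfl
      obtain ⟨hxF, _, hxc⟩ := (hfree x).mp hx
      exact ⟨Relation.ReflTransGen.single ⟨hcF, hxF, hnbr⟩, hxc⟩
    | @step b x hb hnbr hx ih =>
      obtain ⟨hcb, _⟩ := ih
      obtain ⟨hxF, _, hxc⟩ := (hfree x).mp hx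
      exact ⟨Relation.ReflTransGen.tail hcb ⟨pvConn_F hcb hcF, hxF, hnbr⟩, hxc⟩
  · rintro ⟨hconn, hxc⟩
    have key : ∀ x, pvConn n data c x → x = c ∨ pvReach (pvF n (pvSet2 g c.1 c.2)) [c] x := by
      intro x hx
      induction hx with
      | refl => exact Or.inl rfl
      | @tail b x hcb hadj ih =>
        by_cases hxc' : x = c
        · exact Or.inl hxc'
        · right
          have hxfree : pvF n (pvSet2 g c.1 c.2) x := by
            rw [hfree x]
            refine ⟨hadj.2.1, ?_, hxc'⟩
            intro hrem
            exact hnR (pvRem_closed hrem (pvConn_symm (Relation.ReflTransGen.tail hcb hadj)))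
          rcases ih with rfl | hreach
          · exact pvReach.base (List.mem_singleton_self _) hadj.2.2 hxfree
          · exact pvReach.step hreach hadj.2.2 hxfree
    rcases key x hconn with rfl | h
    · exact absurd rfl hxc
    · exact h

lemma pvComp_ncard {n : Int} {data : List (List Int)} {c : Int × Int} (hcF : pvF n data c) :
    (pvComp n data c).ncard = 1 + ({x | pvConn n data c x ∧ x ≠ c}).ncard := by
  have hcomp : pvComp n data c = insert c {x | pvConn n data c x ∧ x ≠ c} := by
    ext x
    simp only [pvComp, Set.mem_setOf_eq, Set.mem_insert_iff]
    constructor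
    · intro h
      by_cases hxc : x = c
      · exact Or.inl hxc
      · exact Or.inr ⟨h, hxc⟩
    · rintro (rfl | ⟨h, _⟩)
      · exact Relation.ReflTransGen.refl
      · exact h
  rw [hcomp, Set.ncard_insert_of_notMem (by simp)
    ((pvComp_finite n data c hcF).subset (by rw [hcomp]; exact fun x hx => Set.mem_insert_iff.mpr (Or.inr hx)))]
  omega

-- the main A-side induction over the scan
lemma pvAfold (n : Int) (data : List (List Int)) :
    ∀ (Q P : List (Int × Int)) (g : List (List Int)) (res : List Int),
      pvCells n = P ++ Q → pvInvA n data P g →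
      (Q.foldl (pvBodyA n) (g, res)).2
        = res ++ (pvSeedF n data Q).map (fun s => ((pvComp n data s).ncard : Int)) := by
  intro Q
  induction Q with
  | nil => intro P g res _ _; simp [pvSeedF_nil]
  | cons c Q' ih =>
    intro P g res hsplit hInv
    have hcmem : c ∈ pvCells n := by rw [hsplit]; exact List.mem_append_right _ (List.mem_cons_self ..)
    have hcin : pvIn n c := mem_pvCells.mp hcmem
    have hsplit' : pvCells n = (P ++ [c]) ++ Q' := by rw [hsplit]; simp
    have hcnotP : c ∉ P := by
      have hnd := pvCells_nodup n
      rw [hsplit] at hnd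
      have hdisj := (List.nodup_append.mp hnd).2.2
      intro hc
      exact hdisj c hc c (List.mem_cons_self ..) rfl
    simp only [List.foldl_cons]
    by_cases hval : pvVal g c.1 c.2 = 1
    · -- a fresh component: c is its seed; the flood removes exactly the component
      have hnR : ¬ pvRem n data P c := by
        intro hrem
        rw [(hInv c hcin).1 hrem] at hval
        norm_num at hval
      have hcF : pvF n data c := ⟨hcin, by rw [← (hInv c hcin).2 hnR]; exact hval⟩
      have hseed : pvSeed n data c := pvSeed_of_first hsplit hcF hnR
      obtain ⟨hfree, hreach⟩ := pvReach_eq_conn hInv hcF hnR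
      have hbody : pvBodyA n (g, res) c =
          ((pvFloodA n (pvSet2 g c.1 c.2) [c] 0).1,
            res ++ [(pvFloodA n (pvSet2 g c.1 c.2) [c] 0).2]) := by
        unfold pvBodyA
        rw [if_pos hval]
      obtain ⟨A1, A2, A3⟩ := pvFloodA_char n (2 * pvOnes (pvSet2 g c.1 c.2) + 1)
        (pvSet2 g c.1 c.2) [c] 0 le_rfl
      have hval1 : pvVal g c.1 c.2 = 1 := hval
      have hvg1 : ∀ x : Int × Int, 0 ≤ x.1 → 0 ≤ x.2 →
          pvVal (pvSet2 g c.1 c.2) x.1 x.2 =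
            if x.1 = c.1 ∧ x.2 = c.2 then 2 else pvVal g x.1 x.2 :=
        fun x ha hb => pvVal_set2 g c.1 c.2 x.1 x.2 hcF.1.1 hcF.1.2.2.1 ha hb hval1
      -- the returned count is the component size
      have hcount : (pvFloodA n (pvSet2 g c.1 c.2) [c] 0).2
          = ((pvComp n data c).ncard : Int) := by
        rw [A3]
        have hset : {x | pvReach (pvF n (pvSet2 g c.1 c.2)) [c] x}
            = {x | pvConn n data c x ∧ x ≠ c} := by
          ext x; exact hreach x
        rw [hset, pvComp_ncard hcF]
        push_cast
        simp
      -- the new grid satisfies the invariant for P ++ [c]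
      have hInv' : pvInvA n data (P ++ [c]) (pvFloodA n (pvSet2 g c.1 c.2) [c] 0).1 := by
        intro x hx
        constructor
        · intro hrem
          rcases pvRem_append.mp hrem with hP | ⟨_, hconn⟩
          · by_cases hr : pvReach (pvF n (pvSet2 g c.1 c.2)) [c] x
            · exact A1 x hr
            · rw [A2 x hx.1 hx.2.2.1 hr, hvg1 x hx.1 hx.2.2.1]
              by_cases hxc : x = c
              · rw [if_pos (by rw [hxc]; exact ⟨rfl, rfl⟩)]
              · rw [if_neg (fun hh => hxc (Prod.ext_iff.mpr ⟨hh.1, hh.2⟩))]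
                exact (hInv x hx).1 hP
          · by_cases hxc : x = c
            · have hnr : ¬ pvReach (pvF n (pvSet2 g c.1 c.2)) [c] x := by
                intro hr
                exact ((hreach x).mp hr).2 hxc
              rw [A2 x hx.1 hx.2.2.1 hnr, hvg1 x hx.1 hx.2.2.1,
                if_pos (by rw [hxc]; exact ⟨rfl, rfl⟩)]
            · exact A1 x ((hreach x).mpr ⟨hconn, hxc⟩)
        · intro hrem
          rw [pvRem_append] at hrem
          push Not at hrem
          obtain ⟨hP, hc2⟩ := hrem
          have hnconn : ¬ pvConn n data c x := fun h => hc2 hseed h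
          have hxc : x ≠ c := fun h => hnconn (h ▸ Relation.ReflTransGen.refl)
          have hnr : ¬ pvReach (pvF n (pvSet2 g c.1 c.2)) [c] x := by
            intro hr
            exact hnconn ((hreach x).mp hr).1
          rw [A2 x hx.1 hx.2.2.1 hnr, hvg1 x hx.1 hx.2.2.1,
            if_neg (fun hh => hxc (Prod.ext_iff.mpr ⟨hh.1, hh.2⟩))]
          exact (hInv x hx).2 hP
      rw [hbody, ih (P ++ [c]) _ _ hsplit' hInv', hcount,
        pvSeedF_cons_pos _ hseed]
      simp
    · -- no new component here: c is not a seed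
      have hbody : pvBodyA n (g, res) c = (g, res) := by
        unfold pvBodyA
        rw [if_neg hval]
      have hnseed : ¬ pvSeed n data c := by
        intro hseed
        by_cases hrem : pvRem n data P c
        · obtain ⟨s, hsP, hs, hsc⟩ := hrem
          have : s = c := pvSeed_unique hs hseed hsc
          exact hcnotP (this ▸ hsP)
        · rw [(hInv c hcin).2 hrem] at hval
          exact hval hseed.1.2
      have hInv' : pvInvA n data (P ++ [c]) g := by
        intro x hx
        have hrem' : pvRem n data (P ++ [c]) x ↔ pvRem n data P x := by
          rw [pvRem_append]
          constructor
          · rintro (h | ⟨hs, _⟩)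
            · exact h
            · exact absurd hs hnseed
          · exact Or.inl
        rw [hrem']
        exact hInv x hx
      rw [hbody, ih (P ++ [c]) _ _ hsplit' hInv', pvSeedF_cons_neg _ hnseed]

-- A's unsorted result list: one component size per seed, in scan order
lemma pvResA (n : Int) (data : List (List Int)) :
    ((pvCells n).foldl (pvBodyA n) (data, [])).2
      = (pvSeedF n data (pvCells n)).map (fun s => ((pvComp n data s).ncard : Int)) := by
  have h := pvAfold n data (pvCells n) [] data [] (by simp)
    (fun c _ => ⟨fun hrem => by obtain ⟨s, hs, _⟩ := hrem; simp at hs, fun _ => rfl⟩)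
  simpa using h

-- ===== B-side: grid bookkeeping =====

def pvShape (n : Int) (g : List (List Int)) : Prop :=
  g.length = n.toNat ∧ ∀ r ∈ g, r.length = n.toNat

lemma pvVal_getElem {n : Int} {g : List (List Int)} (hsh : pvShape n g) {x y : Int}
    (hxy : pvIn n (x, y)) :
    ∃ (hx : x.toNat < g.length) (hy : y.toNat < g[x.toNat].length),
      pvVal g x y = g[x.toNat][y.toNat] := by
  obtain ⟨h1, h2, h3, h4⟩ := hxy
  have hx : x.toNat < g.length := by rw [hsh.1]; omega
  have hy : y.toNat < g[x.toNat].length := by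
    rw [hsh.2 _ (List.getElem_mem hx)]; omega
  refine ⟨hx, hy, ?_⟩
  unfold pvVal
  rw [PySem.List.pyGet?_of_nonneg g h1, List.getElem?_eq_getElem hx]
  simp only [Option.getD_some]
  rw [PySem.List.pyGet?_of_nonneg _ h3, List.getElem?_eq_getElem hy]
  simp

lemma pvSetV_eq {n : Int} {g : List (List Int)} (hsh : pvShape n g) {x y : Int}
    (hxy : pvIn n (x, y)) (v : Int) :
    pvSetV g x y v = g.set x.toNat (g[x.toNat]!.set y.toNat v) := by
  obtain ⟨hx, hy, _⟩ := pvVal_getElem hsh hxy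
  unfold pvSetV
  rw [PySem.List.pyGetD_eq_getElem g [] hxy.1 (by omega)]
  rw [PySem.List.pySetD_of_nonneg _ _ hxy.2.2.1, PySem.List.pySetD_of_nonneg _ _ hxy.1,
    getElem!_pos g x.toNat hx]

lemma pvShape_setV {n : Int} {g : List (List Int)} (hsh : pvShape n g) {x y : Int}
    (hxy : pvIn n (x, y)) (v : Int) : pvShape n (pvSetV g x y v) := by
  obtain ⟨hx, hy, _⟩ := pvVal_getElem hsh hxy
  rw [pvSetV_eq hsh hxy v]
  constructor
  · rw [List.length_set, hsh.1]
  · intro r hr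
    rcases List.mem_or_eq_of_mem_set hr with h | h
    · exact hsh.2 r h
    · rw [h, List.length_set, getElem!_pos g x.toNat hx]
      exact hsh.2 _ (List.getElem_mem hx)

lemma pvVal_setV {n : Int} {g : List (List Int)} (hsh : pvShape n g) {x y : Int}
    (hxy : pvIn n (x, y)) (v : Int) (x' y' : Int) (hx' : 0 ≤ x') (hy' : 0 ≤ y') :
    pvVal (pvSetV g x y v) x' y' = if x' = x ∧ y' = y then v else pvVal g x' y' := by
  obtain ⟨hxl, hyl, _⟩ := pvVal_getElem hsh hxy
  have hx : 0 ≤ x := hxy.1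
  have hy : 0 ≤ y := hxy.2.2.1
  rw [pvSetV_eq hsh hxy v, getElem!_pos g x.toNat hxl]
  unfold pvVal
  rw [PySem.List.pyGet?_of_nonneg _ hx', PySem.List.pyGet?_of_nonneg g hx']
  rw [List.getElem?_set]
  by_cases hxx : x' = x
  · have : x.toNat = x'.toNat := by omega
    rw [if_pos this, if_pos (this ▸ hxl)]
    simp only [Option.getD_some]
    rw [PySem.List.pyGet?_of_nonneg _ hy', PySem.List.pyGet?_of_nonneg _ hy']
    rw [List.getElem?_set]
    by_cases hyy : y' = y
    · have hyn : y.toNat = y'.toNat := by omega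
      rw [if_pos hyn, if_pos (hyn ▸ hyl), if_pos ⟨hxx, hyy⟩]
      simp
    · have hyn : ¬ (y.toNat = y'.toNat) := by omega
      rw [if_neg hyn, if_neg (by tauto)]
      have : g[x'.toNat]? = some g[x.toNat] := by
        rw [List.getElem?_eq_some_iff]; exact ⟨this ▸ hxl, by congr 1; omega⟩
      rw [this]
      simp
  · have hxn : ¬ (x.toNat = x'.toNat) := by omega
    rw [if_neg hxn, if_neg (by tauto)]

lemma pvMu_setV {n : Int} {g : List (List Int)} (hsh : pvShape n g) {x y : Int}
    (hxy : pvIn n (x, y)) (v : Int) :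
    pvMu (pvSetV g x y v) + (pvVal g x y + 1).toNat = pvMu g + (v + 1).toNat := by
  obtain ⟨hxl, hyl, hval⟩ := pvVal_getElem hsh hxy
  rw [pvSetV_eq hsh hxy v, getElem!_pos g x.toNat hxl]
  unfold pvMu
  rw [List.map_set]
  have hs := pvSumSet (g.map (fun r => (r.map (fun z => (z + 1).toNat)).sum)) x.toNat
    (by simpa using hxl) (((g[x.toNat].set y.toNat v).map (fun z => (z + 1).toNat)).sum)
  simp only [List.getElem_map] at hs
  have hin : ((g[x.toNat].set y.toNat v).map (fun z => (z + 1).toNat)).sum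
      + (g[x.toNat][y.toNat] + 1).toNat
      = ((g[x.toNat].map (fun z => (z + 1).toNat)).sum) + (v + 1).toNat := by
    rw [List.map_set]
    have := pvSumSet (g[x.toNat].map (fun z => (z + 1).toNat)) y.toNat
      (by simpa using hyl) ((v + 1).toNat)
    simp only [List.getElem_map] at this
    omega
  rw [hval]
  omega

-- ===== B-side: the invariant and one relaxation step =====

lemma pvIdx_nonneg {n : Int} {c : Int × Int} (h : pvIn n c) : 0 ≤ pvIdx n c := by
  obtain ⟨h1, h2, h3, h4⟩ := h
  unfold pvIdx
  have : 0 ≤ c.1 * n := mul_nonneg h1 (by omega)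
  omega

-- local minimality of a label grid at a cell (what a no-change sweep certifies)
def pvLocal (n : Int) (data L : List (List Int)) (c : Int × Int) : Prop :=
  pvF n data c → ∀ d ∈ pvNbr c, pvIn n d → pvVal L d.1 d.2 ≠ -1 →
    pvVal L c.1 c.2 ≤ pvVal L d.1 d.2

-- the label-grid invariant: free cells carry the index of some cell of their own
-- component, at most their own; blocked cells carry -1
def pvInvB (n : Int) (data L : List (List Int)) : Prop :=
  pvShape n L ∧
  (∀ c : Int × Int, pvIn n c → ¬ pvF n data c → pvVal L c.1 c.2 = -1) ∧
  (∀ c : Int × Int, pvF n data c →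
    (∃ d, pvConn n data c d ∧ pvVal L c.1 c.2 = pvIdx n d) ∧
      pvVal L c.1 c.2 ≤ pvIdx n c)

lemma pvInvB_nonneg {n : Int} {data L : List (List Int)} (hInv : pvInvB n data L)
    {c : Int × Int} (hc : pvF n data c) : 0 ≤ pvVal L c.1 c.2 := by
  obtain ⟨⟨d, hconn, hval⟩, _⟩ := hInv.2.2 c hc
  rw [hval]
  exact pvIdx_nonneg (pvConn_F hconn hc).1

lemma pvInvB_free_iff {n : Int} {data L : List (List Int)} (hInv : pvInvB n data L)
    {c : Int × Int} (hc : pvIn n c) : pvVal L c.1 c.2 ≠ -1 ↔ pvF n data c := by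
  constructor
  · intro h
    by_contra hF
    exact h (hInv.2.1 c hc hF)
  · intro h
    have := pvInvB_nonneg hInv h
    omega

lemma pvIte_le {c : Prop} [Decidable c] (m v : Int) : (if c then min m v else m) ≤ m := by
  split_ifs
  · exact min_le_left _ _
  · exact le_rfl

lemma pvIte_le_of {c : Prop} [Decidable c] (h : c) (m v : Int) :
    (if c then min m v else m) ≤ v := by
  rw [if_pos h]; exact min_le_right _ _

lemma pvIte_cases {c : Prop} [Decidable c] (m v : Int) :
    (if c then min m v else m) = m ∨ (c ∧ (if c then min m v else m) = v) := by
  split_ifs with h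
  · rcases le_total m v with h' | h'
    · exact Or.inl (min_eq_left h')
    · exact Or.inr ⟨h, min_eq_right h'⟩
  · exact Or.inl rfl

lemma pvRelax_spec {n : Int} {data L : List (List Int)} (hInv : pvInvB n data L)
    {i j : Int} (hc : pvIn n (i, j)) (hfree : pvVal L i j ≠ -1) :
    pvInvB n data (pvRelax n i j L).1 ∧
    ((pvRelax n i j L).2 = false → (pvRelax n i j L).1 = L ∧ pvLocal n data L (i, j)) ∧
    ((pvRelax n i j L).2 = true → pvMu (pvRelax n i j L).1 < pvMu L) ∧
    pvMu (pvRelax n i j L).1 ≤ pvMu L := by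
  have hcF : pvF n data (i, j) := (pvInvB_free_iff hInv hc).mp hfree
  set m1 := if i + 1 < n ∧ pvVal L (i + 1) j ≠ -1
    then min (pvVal L i j) (pvVal L (i + 1) j) else pvVal L i j with hm1
  set m2 := if 0 < i ∧ pvVal L (i - 1) j ≠ -1
    then min m1 (pvVal L (i - 1) j) else m1 with hm2
  set m3 := if j + 1 < n ∧ pvVal L i (j + 1) ≠ -1
    then min m2 (pvVal L i (j + 1)) else m2 with hm3
  set m4 := if 0 < j ∧ pvVal L i (j - 1) ≠ -1
    then min m3 (pvVal L i (j - 1)) else m3 with hm4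
  have hrelax : pvRelax n i j L =
      if m4 < pvVal L i j then (pvSetV L i j m4, true) else (L, false) := rfl
  have h41 : m4 ≤ m1 :=
    le_trans (le_trans (pvIte_le _ _) (pvIte_le _ _)) (pvIte_le _ _)
  have h40 : m4 ≤ pvVal L i j := le_trans h41 (pvIte_le _ _)
  -- every value fed into the min chain is the label of a cell connected to (i,j)
  have hstep : ∀ d : Int × Int, pvIn n d → d ∈ pvNbr (i, j) → pvVal L d.1 d.2 ≠ -1 →
      ∃ e, pvConn n data (i, j) e ∧ pvVal L d.1 d.2 = pvIdx n e := by
    intro d hdin hdnbr hdval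
    have hdF : pvF n data d := (pvInvB_free_iff hInv hdin).mp hdval
    obtain ⟨⟨e, hconn, hval⟩, _⟩ := hInv.2.2 d hdF
    exact ⟨e, Relation.ReflTransGen.trans
      (Relation.ReflTransGen.single ⟨hcF, hdF, hdnbr⟩) hconn, hval⟩
  have hm4conn : ∃ e, pvConn n data (i, j) e ∧ m4 = pvIdx n e := by
    have h0 : ∃ e, pvConn n data (i, j) e ∧ pvVal L i j = pvIdx n e :=
      ⟨(hInv.2.2 (i, j) hcF).1.choose, (hInv.2.2 (i, j) hcF).1.choose_spec⟩
    have hnext : ∀ (m : Int) (x y : Int) (cond : Prop) [inst : Decidable cond]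
        (hsub : cond → pvIn n (x, y) ∧ (x, y) ∈ pvNbr (i, j) ∧ pvVal L x y ≠ -1),
        (∃ e, pvConn n data (i, j) e ∧ m = pvIdx n e) →
        (∃ e, pvConn n data (i, j) e ∧
          (if cond then min m (pvVal L x y) else m) = pvIdx n e) := by
      intro m x y cond inst hsub hm
      rcases pvIte_cases (c := cond) m (pvVal L x y) with h | ⟨hcond, h⟩
      · rw [h]; exact hm
      · rw [h]
        obtain ⟨h1, h2, h3⟩ := hsub hcond
        exact hstep (x, y) h1 h2 h3
    obtain ⟨hi1, hi2, hi3, hi4⟩ := hc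
    refine hnext m3 i (j - 1) _ (fun h => ⟨⟨by omega, by omega, by omega, by omega⟩,
        by simp [pvNbr], h.2⟩) ?_
    refine hnext m2 i (j + 1) _ (fun h => ⟨⟨by omega, by omega, by omega, h.1⟩,
        by simp [pvNbr], h.2⟩) ?_
    refine hnext m1 (i - 1) j _ (fun h => ⟨⟨by omega, by omega, by omega, by omega⟩,
        by simp [pvNbr], h.2⟩) ?_
    refine hnext (pvVal L i j) (i + 1) j _ (fun h => ⟨⟨by omega, h.1, by omega, by omega⟩,
        by simp [pvNbr], h.2⟩) h0
  rw [hrelax]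
  by_cases hlt : m4 < pvVal L i j
  · rw [if_pos hlt]
    obtain ⟨e, heconn, hem⟩ := hm4conn
    have hm4nn : 0 ≤ m4 := by
      rw [hem]; exact pvIdx_nonneg (pvConn_F heconn hcF).1
    have hsh' := pvShape_setV hInv.1 hc m4
    have hvals := pvVal_setV hInv.1 hc m4
    refine ⟨⟨hsh', ?_, ?_⟩, by simp, ?_, ?_⟩
    · intro x hx hxF
      have hxne : x ≠ (i, j) := fun h => hxF (h ▸ hcF)
      rw [show pvVal (pvSetV L i j m4) x.1 x.2 = pvVal L x.1 x.2 by
        rw [hvals x.1 x.2 hx.1 hx.2.2.1, if_neg (fun hh =>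
          hxne (Prod.ext_iff.mpr ⟨hh.1, hh.2⟩))]]
      exact hInv.2.1 x hx hxF
    · intro x hxF
      by_cases hxe : x = (i, j)
      · have hx1 : x.1 = i := by rw [hxe]
        have hx2 : x.2 = j := by rw [hxe]
        rw [hvals x.1 x.2 hxF.1.1 hxF.1.2.2.1, if_pos ⟨hx1, hx2⟩]
        refine ⟨⟨e, hxe ▸ heconn, hem⟩, ?_⟩
        rw [hxe]
        exact le_trans (le_of_lt hlt) (hInv.2.2 _ hcF).2
      · rw [hvals x.1 x.2 hxF.1.1 hxF.1.2.2.1, if_neg (fun hh =>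
          hxe (Prod.ext_iff.mpr ⟨hh.1, hh.2⟩))]
        exact hInv.2.2 x hxF
    · intro _
      show pvMu (pvSetV L i j m4) < pvMu L
      have h := pvMu_setV hInv.1 hc m4
      have hts : (m4 + 1).toNat < (pvVal L i j + 1).toNat := by omega
      omega
    · show pvMu (pvSetV L i j m4) ≤ pvMu L
      have h := pvMu_setV hInv.1 hc m4
      have hts : (m4 + 1).toNat ≤ (pvVal L i j + 1).toNat := by omega
      omega
  · rw [if_neg hlt]
    refine ⟨hInv, ?_, by simp, le_rfl⟩
    intro _
    refine ⟨rfl, ?_⟩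
    intro _ d hdnbr hdin hdval
    have hle : pvVal L i j ≤ m4 := by omega
    have h43 : m4 ≤ m3 := pvIte_le _ _
    have h42 : m4 ≤ m2 := le_trans h43 (pvIte_le _ _)
    fin_cases hdnbr
    · -- (i+1, j)
      refine le_trans hle (le_trans h41 (pvIte_le_of ⟨?_, hdval⟩ _ _))
      exact hdin.2.1
    · -- (i, j-1)
      refine le_trans hle (pvIte_le_of ⟨?_, hdval⟩ _ _)
      have := hdin.2.2.1
      omega
    · -- (i-1, j)
      refine le_trans hle (le_trans h42 (pvIte_le_of ⟨?_, hdval⟩ _ _))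
      have := hdin.1
      omega
    · -- (i, j+1)
      refine le_trans hle (le_trans h43 (pvIte_le_of ⟨?_, hdval⟩ _ _))
      exact hdin.2.2.2

lemma pvCell_spec {n : Int} {data : List (List Int)} {st : List (List Int) × Bool}
    {c : Int × Int} (hInv : pvInvB n data st.1) (hc : pvIn n c) :
    pvInvB n data (pvCell n st c).1 ∧
    ((pvCell n st c).2 = false → (pvCell n st c).1 = st.1 ∧ st.2 = false ∧
      pvLocal n data st.1 c) ∧
    (st.2 = false → (pvCell n st c).2 = true → pvMu (pvCell n st c).1 < pvMu st.1) ∧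
    pvMu (pvCell n st c).1 ≤ pvMu st.1 := by
  obtain ⟨c1, c2⟩ := c
  unfold pvCell
  by_cases hval : pvVal st.1 c1 c2 ≠ -1
  · rw [if_pos hval]
    obtain ⟨R1, R2, R3, R4⟩ := pvRelax_spec hInv hc hval
    refine ⟨R1, ?_, ?_, R4⟩
    · intro h
      simp only [Bool.or_eq_false_iff] at h
      obtain ⟨hst, hr⟩ := h
      obtain ⟨hL, hloc⟩ := R2 hr
      exact ⟨hL, hst, hloc⟩
    · intro hb htrue
      rw [hb] at htrue
      simp only [Bool.false_or] at htrue
      exact R3 htrue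
  · rw [if_neg hval]
    push Not at hval
    refine ⟨hInv, ?_, by simp, le_rfl⟩
    intro hb
    refine ⟨rfl, hb, ?_⟩
    intro hF
    exact absurd hval (by simpa using (pvInvB_free_iff hInv hc).mpr hF)

-- ===== B-side: sweeps, the while loop, and the fixpoint =====

lemma pvFold_spec (n : Int) (data : List (List Int)) :
    ∀ (cs : List (Int × Int)), (∀ c ∈ cs, pvIn n c) →
    ∀ (L : List (List Int)) (b : Bool), pvInvB n data L →
    pvInvB n data (cs.foldl (pvCell n) (L, b)).1 ∧
    ((cs.foldl (pvCell n) (L, b)).2 = false →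
      (cs.foldl (pvCell n) (L, b)).1 = L ∧ b = false ∧ ∀ c ∈ cs, pvLocal n data L c) ∧
    (b = false → (cs.foldl (pvCell n) (L, b)).2 = true →
      pvMu (cs.foldl (pvCell n) (L, b)).1 < pvMu L) ∧
    pvMu (cs.foldl (pvCell n) (L, b)).1 ≤ pvMu L := by
  intro cs
  induction cs with
  | nil =>
    intro _ L b hInv
    refine ⟨hInv, fun h => ⟨rfl, h, by simp⟩, fun hb h => absurd h (by simp [hb]), le_rfl⟩
  | cons c cs ih =>
    intro hmem L b hInv
    have hc : pvIn n c := hmem c (List.mem_cons_self ..)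
    obtain ⟨C1, C2, C3, C4⟩ := pvCell_spec (st := (L, b)) hInv hc
    rcases h1 : pvCell n (L, b) c with ⟨L1, b1⟩
    rw [h1] at C1 C2 C3 C4
    simp only at C1 C2 C3 C4
    obtain ⟨I1, I2, I3, I4⟩ := ih (fun x hx => hmem x (List.mem_cons_of_mem _ hx)) L1 b1 C1
    simp only [List.foldl_cons, h1]
    refine ⟨I1, ?_, ?_, le_trans I4 C4⟩
    · intro hfin
      obtain ⟨hL1, hb1, hlocs⟩ := I2 hfin
      obtain ⟨hLL, hbb, hlocc⟩ := C2 hb1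
      subst hLL
      refine ⟨hL1, hbb, ?_⟩
      intro x hx
      rcases List.mem_cons.mp hx with rfl | hx'
      · exact hlocc
      · exact hlocs x hx'
    · intro hb htrue
      subst hb
      by_cases hb1 : b1 = true
      · have := C3 rfl hb1
        omega
      · have hb1' : b1 = false := by simpa using hb1
        obtain ⟨hLL, _, _⟩ := C2 hb1'
        subst hLL
        exact I3 hb1' htrue

lemma pvSweep_eq (n : Int) (is js : List Int) (st : List (List Int) × Bool) :
    pvSweep n is js st
      = (is.flatMap (fun i => js.map (fun j => (i, j)))).foldl (pvCell n) st := by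
  unfold pvSweep
  rw [List.foldl_flatMap]
  congr 1
  funext st i
  rw [List.foldl_map]

lemma pvRound_spec (n : Int) (data L : List (List Int)) (hInv : pvInvB n data L) :
    pvInvB n data (pvRound n L).1 ∧
    ((pvRound n L).2 = false → (pvRound n L).1 = L ∧
      ∀ c, pvIn n c → pvLocal n data L c) ∧
    ((pvRound n L).2 = true → pvMu (pvRound n L).1 < pvMu L) := by
  have hfwd : (PySem.List.pyRange 0 n 1).flatMap
      (fun i => (PySem.List.pyRange 0 n 1).map (fun j => (i, j))) = pvCells n := rfl
  have hmemf : ∀ c ∈ pvCells n, pvIn n c := fun c hc => mem_pvCells.mp hc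
  have hmemb : ∀ c ∈ (PySem.List.pyRange 0 n 1).reverse.flatMap
      (fun i => (PySem.List.pyRange 0 n 1).reverse.map (fun j => (i, j))), pvIn n c := by
    intro c hc
    rw [List.mem_flatMap] at hc
    obtain ⟨i, hi, hc⟩ := hc
    rw [List.mem_reverse, PySem.List.mem_pyRange_one] at hi
    rw [List.mem_map] at hc
    obtain ⟨j, hj, rfl⟩ := hc
    rw [List.mem_reverse, PySem.List.mem_pyRange_one] at hj
    exact ⟨hi.1, hi.2, hj.1, hj.2⟩
  unfold pvRound
  rw [pvSweep_eq, pvSweep_eq, hfwd]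
  rcases h1 : (pvCells n).foldl (pvCell n) (L, false) with ⟨L1, b1⟩
  obtain ⟨F1, F2, F3, F4⟩ := pvFold_spec n data (pvCells n) hmemf L false hInv
  rw [h1] at F1 F2 F3 F4
  simp only at F1 F2 F3 F4
  obtain ⟨G1, G2, G3, G4⟩ := pvFold_spec n data _ hmemb L1 b1 F1
  refine ⟨G1, ?_, ?_⟩
  · intro hfin
    obtain ⟨hL1, hb1, _⟩ := G2 hfin
    obtain ⟨hLL, _, hlocs⟩ := F2 hb1
    subst hLL
    exact ⟨hL1, fun c hc => hlocs c (mem_pvCells.mpr hc)⟩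
  · intro htrue
    by_cases hb1 : b1 = true
    · have := F3 trivial hb1
      have := G4
      omega
    · have hb1' : b1 = false := by simpa using hb1
      obtain ⟨hLL, _, _⟩ := F2 hb1'
      subst hLL
      exact G3 hb1' htrue

lemma pvLoop_spec (n : Int) (data : List (List Int)) :
    ∀ (fuel : Nat) (L : List (List Int)), pvInvB n data L → pvMu L < fuel →
    pvInvB n data (pvLoop n fuel L) ∧
    ∀ c, pvIn n c → pvLocal n data (pvLoop n fuel L) c := by
  intro fuel
  induction fuel with
  | zero => intro L _ h; omega
  | succ f ih =>
    intro L hInv hμ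
    obtain ⟨R1, R2, R3⟩ := pvRound_spec n data L hInv
    have hunf : pvLoop n (f + 1) L =
        if (pvRound n L).2 then pvLoop n f (pvRound n L).1 else (pvRound n L).1 := rfl
    rw [hunf]
    by_cases hr : (pvRound n L).2 = true
    · rw [if_pos hr]
      exact ih (pvRound n L).1 R1 (by have := R3 hr; omega)
    · have hr' : (pvRound n L).2 = false := by simpa using hr
      rw [if_neg hr]
      obtain ⟨hL, hlocs⟩ := R2 hr'
      rw [hL]
      exact ⟨hInv, hlocs⟩

-- at the fixpoint, labels are constant on components …
lemma pvConnVal {n : Int} {data R : List (List Int)} (hInv : pvInvB n data R)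
    (hloc : ∀ c, pvIn n c → pvLocal n data R c) {a b : Int × Int}
    (h : pvConn n data a b) : pvVal R a.1 a.2 = pvVal R b.1 b.2 := by
  induction h with
  | refl => rfl
  | @tail b' x hcb hadj ih =>
    obtain ⟨hbF, hxF, hnbr⟩ := hadj
    have h1 : pvVal R b'.1 b'.2 ≤ pvVal R x.1 x.2 :=
      hloc b' hbF.1 hbF x hnbr hxF.1 ((pvInvB_free_iff hInv hxF.1).mpr hxF)
    have h2 : pvVal R x.1 x.2 ≤ pvVal R b'.1 b'.2 :=
      hloc x hxF.1 hxF b' ((pvNbr_symm b' x).mpr hnbr) hbF.1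
        ((pvInvB_free_iff hInv hbF.1).mpr hbF)
    rw [ih]
    omega

-- … and equal to the index of the component's seed
lemma pvFixVal {n : Int} {data R : List (List Int)} (hInv : pvInvB n data R)
    (hloc : ∀ c, pvIn n c → pvLocal n data R c) {c : Int × Int} (hcF : pvF n data c) :
    pvVal R c.1 c.2 = pvIdx n (pvSeedOf n data c) := by
  obtain ⟨hs, hsc⟩ := pvSeedOf_spec hcF
  have hconst : pvVal R (pvSeedOf n data c).1 (pvSeedOf n data c).2 = pvVal R c.1 c.2 :=
    pvConnVal hInv hloc hsc
  obtain ⟨⟨d, hconn, hval⟩, hle⟩ := hInv.2.2 _ hs.1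
  have hge : pvIdx n (pvSeedOf n data c) ≤ pvVal R (pvSeedOf n data c).1 (pvSeedOf n data c).2 := by
    rw [hval]
    exact hs.2 d hconn
  omega

-- ===== final assembly =====

lemma pvVal_mkGrid (n : Int) (f : Int → Int → Int) {c : Int × Int} (h : pvIn n c) :
    pvVal ((PySem.List.pyRange 0 n 1).map (fun x =>
      (PySem.List.pyRange 0 n 1).map (fun y => f x y))) c.1 c.2 = f c.1 c.2 := by
  obtain ⟨h1, h2, h3, h4⟩ := h
  unfold pvVal
  rw [PySem.List.pyGet?_of_nonneg _ h1, List.getElem?_map, PySem.List.getElem?_pyRange_one,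
    if_pos (show c.1.toNat < (n - 0).toNat by omega)]
  simp only [Option.map_some, Option.getD_some]
  rw [PySem.List.pyGet?_of_nonneg _ h3, List.getElem?_map, PySem.List.getElem?_pyRange_one,
    if_pos (show c.2.toNat < (n - 0).toNat by omega)]
  simp only [Option.map_some, Option.getD_some]
  rw [show (0 + (c.1.toNat : Int)) = c.1 by omega, show (0 + (c.2.toNat : Int)) = c.2 by omega]

lemma pvInitL_shape (n : Int) (data : List (List Int)) : pvShape n (pvInitL n data) := by
  constructor
  · rw [pvInitL, List.length_map, PySem.List.length_pyRange_one]
    simp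
  · intro r hr
    rw [pvInitL, List.mem_map] at hr
    obtain ⟨i, _, rfl⟩ := hr
    rw [List.length_map, PySem.List.length_pyRange_one]
    simp

lemma pvInitL_inv (n : Int) (data : List (List Int)) : pvInvB n data (pvInitL n data) := by
  have hval : ∀ c : Int × Int, pvIn n c → pvVal (pvInitL n data) c.1 c.2
      = if pvVal data c.1 c.2 = 1 then c.1 * n + c.2 else -1 :=
    fun c hc => pvVal_mkGrid n (fun x y => if pvVal data x y = 1 then x * n + y else -1) hc
  refine ⟨pvInitL_shape n data, ?_, ?_⟩
  · intro c hc hF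
    rw [hval c hc, if_neg (fun h => hF ⟨hc, h⟩)]
  · intro c hcF
    rw [hval c hcF.1, if_pos hcF.2]
    exact ⟨⟨c, Relation.ReflTransGen.refl, rfl⟩, le_rfl⟩

lemma pvMem_pvSeedF {n : Int} {data : List (List Int)} {l : List (Int × Int)} {s : Int × Int} :
    s ∈ pvSeedF n data l ↔ s ∈ l ∧ pvSeed n data s := by
  unfold pvSeedF
  rw [List.mem_filter]
  constructor
  · rintro ⟨h1, h2⟩
    exact ⟨h1, @of_decide_eq_true _ (Classical.propDecidable _) h2⟩
  · rintro ⟨h1, h2⟩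
    exact ⟨h1, @decide_eq_true _ (Classical.propDecidable _) h2⟩

lemma pvLen_ncard {l : List (Int × Int)} (hnd : l.Nodup) {p : (Int × Int) → Bool}
    {S : Set (Int × Int)} (h : ∀ x, x ∈ S ↔ (x ∈ l ∧ p x = true)) :
    (l.filter p).length = S.ncard := by
  have hset : S = {x | x ∈ l.filter p} := by
    ext x
    rw [h x]
    simp [List.mem_filter]
  rw [hset, show {x | x ∈ l.filter p} = ↑(l.filter p).toFinset by ext x; simp,
    Set.ncard_coe_finset, List.toFinset_card_of_nodup (hnd.filter p)]

noncomputable def pvFb (n : Int) (data : List (List Int)) (c : Int × Int) : Bool :=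
  @decide (pvF n data c) (Classical.propDecidable _)

lemma pvFb_iff {n : Int} {data : List (List Int)} {c : Int × Int} :
    pvFb n data c = true ↔ pvF n data c := by
  unfold pvFb
  exact @decide_eq_true_iff _ (Classical.propDecidable _)

noncomputable def pvConnb (n : Int) (data : List (List Int)) (s c : Int × Int) : Bool :=
  @decide (pvConn n data s c) (Classical.propDecidable _)

lemma pvConnb_iff {n : Int} {data : List (List Int)} {s c : Int × Int} :
    pvConnb n data s c = true ↔ pvConn n data s c := by
  unfold pvConnb
  exact @decide_eq_true_iff _ (Classical.propDecidable _)

-- ===== VERDICT (by name: the statement is the Claim_ definition above) =====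
theorem solution_spec : Claim_equal_solution := by
  intro n data _ _
  unfold Spec_solution
  show solution n data = solution_alt n data
  -- name the fixpoint label grid
  have hB : solution_alt n data =
      (let R := pvLoop n (pvMu (pvInitL n data) + 1) (pvInitL n data)
       let flat := (PySem.List.pyRange 0 n 1).flatMap (fun i =>
         ((PySem.List.pyRange 0 n 1).filter (fun j => pvVal R i j != -1)).map
           (fun j => pvVal R i j))
       let roots := PySem.List.sorted (PySem.Set.ofList flat) (fun x => x) false
       let sizes := PySem.List.sorted (roots.map (fun r => (PySem.List.count flat r : Int)))
         (fun x => x) false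
       PySem.Int.toStr (PySem.List.len roots) ++ "\n" ++
         PySem.Str.join "\n" (sizes.map PySem.Int.toStr)) := rfl
  rw [pvSolutionA, hB]
  simp only []
  set R := pvLoop n (pvMu (pvInitL n data) + 1) (pvInitL n data) with hR
  obtain ⟨hInvR, hlocR⟩ :=
    pvLoop_spec n data (pvMu (pvInitL n data) + 1) (pvInitL n data)
      (pvInitL_inv n data) (by omega)
  rw [← hR] at hInvR hlocR
  have hvF : ∀ c : Int × Int, pvF n data c →
      pvVal R c.1 c.2 = pvIdx n (pvSeedOf n data c) :=
    fun c hc => pvFixVal hInvR hlocR hc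
  have hvNF : ∀ c : Int × Int, pvIn n c → ¬ pvF n data c → pvVal R c.1 c.2 = -1 :=
    hInvR.2.1
  -- the flattened label list over the scan
  have h1 : (PySem.List.pyRange 0 n 1).flatMap (fun i =>
        ((PySem.List.pyRange 0 n 1).filter (fun j => pvVal R i j != -1)).map
          (fun j => pvVal R i j))
      = ((pvCells n).filter (fun c => pvVal R c.1 c.2 != -1)).map
          (fun c => pvVal R c.1 c.2) := by
    unfold pvCells
    rw [List.filter_flatMap, List.map_flatMap]
    congr 1
    funext i
    rw [List.filter_map, List.map_map]
    rfl
  set freeL := (pvCells n).filter (pvFb n data) with hfreeL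
  have hmemfree : ∀ c : Int × Int, c ∈ freeL ↔ pvF n data c := by
    intro c
    rw [hfreeL, List.mem_filter]
    constructor
    · rintro ⟨_, h⟩; exact pvFb_iff.mp h
    · intro h; exact ⟨mem_pvCells.mpr h.1, pvFb_iff.mpr h⟩
  have h2 : (pvCells n).filter (fun c => pvVal R c.1 c.2 != -1) = freeL := by
    rw [hfreeL]
    apply List.filter_congr
    intro c hc
    have hcin := mem_pvCells.mp hc
    by_cases hF : pvF n data c
    · have hge : 0 ≤ pvVal R c.1 c.2 := by
        rw [hvF c hF]
        exact pvIdx_nonneg (pvSeedOf_spec hF).1.1.1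
      rw [pvFb_iff.mpr hF]
      simp only [bne_iff_ne, ne_eq]
      omega
    · rw [hvNF c hcin hF]
      have : pvFb n data c = false := by
        rw [← Bool.not_eq_true, pvFb_iff]
        exact hF
      rw [this]
      simp
  have h3 : freeL.map (fun c => pvVal R c.1 c.2)
      = freeL.map (fun c => pvIdx n (pvSeedOf n data c)) :=
    List.map_congr_left (fun c hc => hvF c ((hmemfree c).mp hc))
  have hflat : (PySem.List.pyRange 0 n 1).flatMap (fun i =>
        ((PySem.List.pyRange 0 n 1).filter (fun j => pvVal R i j != -1)).map
          (fun j => pvVal R i j))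
      = freeL.map (fun c => pvIdx n (pvSeedOf n data c)) := by
    rw [h1, h2, h3]
  set sList := pvSeedF n data (pvCells n) with hsList
  have hsListmem : ∀ s, s ∈ sList ↔ pvSeed n data s := by
    intro s
    rw [hsList, pvMem_pvSeedF]
    constructor
    · exact And.right
    · intro h; exact ⟨mem_pvCells.mpr h.1.1, h⟩
  have hsListpw : sList.Pairwise (fun a b => pvIdx n a < pvIdx n b) := by
    rw [hsList]
    unfold pvSeedF
    exact List.Pairwise.sublist List.filter_sublist (pvCells_pairwise n)
  -- sorted(set(flat)) is the seed indices in scan order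
  have hroots : PySem.List.sorted (PySem.Set.ofList
        (freeL.map (fun c => pvIdx n (pvSeedOf n data c)))) (fun x => x) false
      = sList.map (pvIdx n) := by
    apply PySem.List.sorted_eq_of_perm_of_pairwise_lt
    · rw [List.perm_ext_iff_of_nodup
        (((List.pairwise_map).mpr hsListpw).imp (fun h => ne_of_lt h))
        (PySem.Set.nodup_ofList _)]
      intro x
      rw [PySem.Set.mem_ofList, List.mem_map, List.mem_map]
      constructor
      · rintro ⟨s, hs, rfl⟩
        have hseed := (hsListmem s).mp hs
        refine ⟨s, (hmemfree s).mpr hseed.1, ?_⟩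
        rw [pvSeedOf_eq hseed Relation.ReflTransGen.refl]
      · rintro ⟨c, hc, rfl⟩
        have hcF := (hmemfree c).mp hc
        exact ⟨pvSeedOf n data c, (hsListmem _).mpr (pvSeedOf_spec hcF).1, rfl⟩
    · exact (List.pairwise_map).mpr hsListpw
  -- per-seed counts are the component sizes
  have hcount : ∀ s, pvSeed n data s →
      PySem.List.count (freeL.map (fun c => pvIdx n (pvSeedOf n data c))) (pvIdx n s)
        = (pvComp n data s).ncard := by
    intro s hs
    rw [PySem.List.count_eq, List.count_eq_countP, List.countP_map]
    have hcp : List.countP ((fun x => x == pvIdx n s) ∘ (fun c => pvIdx n (pvSeedOf n data c))) freeL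
        = List.countP (pvConnb n data s) freeL := by
      apply List.countP_congr
      intro c hc
      have hcF := (hmemfree c).mp hc
      simp only [Function.comp_apply, beq_iff_eq, pvConnb_iff]
      constructor
      · intro h
        have hEq : pvSeedOf n data c = s :=
          pvIdx_inj (pvSeedOf_spec hcF).1.1.1 hs.1.1 h
        exact (pvSeedOf_iff hs hcF).mp hEq
      · intro h
        rw [pvSeedOf_eq hs h]
    rw [hcp, List.countP_eq_length_filter, hfreeL, List.filter_filter]
    have hfc : List.filter (fun c => pvConnb n data s c && pvFb n data c) (pvCells n)
        = List.filter (pvConnb n data s) (pvCells n) := by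
      apply List.filter_congr
      intro c _
      by_cases h : pvConn n data s c
      · rw [pvConnb_iff.mpr h, pvFb_iff.mpr (pvConn_F h hs.1)]
        rfl
      · have : pvConnb n data s c = false := by
          rw [← Bool.not_eq_true, pvConnb_iff]
          exact h
        rw [this]
        rfl
    rw [hfc]
    apply pvLen_ncard (pvCells_nodup n)
    intro x
    constructor
    · intro h
      have hxF : pvF n data x := pvConn_F h hs.1
      exact ⟨mem_pvCells.mpr hxF.1, pvConnb_iff.mpr h⟩
    · rintro ⟨_, h⟩
      exact pvConnb_iff.mp h
  -- both unsorted size lists coincide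
  have hsizes : (sList.map (pvIdx n)).map
        (fun r => (PySem.List.count (freeL.map (fun c => pvIdx n (pvSeedOf n data c))) r : Int))
      = ((pvCells n).foldl (pvBodyA n) (data, [])).2 := by
    rw [pvResA, List.map_map, ← hsList]
    apply List.map_congr_left
    intro s hs
    simp only [Function.comp_apply]
    rw [hcount s ((hsListmem s).mp hs)]
  rw [hflat, hroots, hsizes]
  congr 2
  rw [PySem.List.len_eq, PySem.List.len_eq, PySem.List.length_sorted, ← hsizes]
  simp
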